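-- pv_equiv track=rewrite | github.com/venux021/soda | ita/c15/qz05a.py | align_plan
-- ===== SOURCE A (Python) =====
-- def align_plan(d1, d2, copy, replace, insert, delete):
--     m = len(d1)
--     n = len(d2)
--     d1 = [''] + list(d1)
--     d2 = [''] + list(d2)
--
--     dp = [[0] * (n+1) for i in range(m+1)]
--     action = [[None] * (n+1) for i in range(m+1)]
--     for i in range(1, n+1):
--         dp[0][i] = dp[0][i-1] + insert
--         action[0][i] = 'I'
--     for i in range(1, m+1):
--         dp[i][0] = dp[i-1][0] + delete
--         action[i][0] = 'D'
--
--     for i in range(1, m+1):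
--         for j in range(1, n+1):
--             c_replace = dp[i-1][j-1] + replace
--             dp[i][j] = c_replace
--             action[i][j] = 'R'
--
--             c_insert = dp[i][j-1] + insert
--             if c_insert < dp[i][j]:
--                 dp[i][j] = c_insert
--                 action[i][j] = 'I'
--
--             c_delete = dp[i-1][j] + delete
--             if c_delete < dp[i][j]:
--                 dp[i][j] = c_delete
--                 action[i][j] = 'D'
--
--             if d1[i] == d2[j]:
--                 c_copy = dp[i-1][j-1] + copy
--                 if c_copy < dp[i][j]:
--                     dp[i][j] = c_copy
--                     action[i][j] = 'C'
--
--     acts = []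
--     i = m
--     j = n
--     while i > 0 or j > 0:
--         a = action[i][j]
--         acts.append(a)
--         if a == 'C' or a == 'R':
--             i -= 1
--             j -= 1
--         elif a == 'I':
--             j -= 1
--         else:
--             i -= 1
--
--     acts = acts[::-1]
--
--     i = j = 1
--     k1 = []
--     k2 = []
--     k3 = []
--
--     for a in acts:
--         if a == 'I':
--             k1.append(' ')
--             k2.append(d2[j])
--             j += 1
--             k3.append('*')
--         elif a == 'D':
--             k1.append(d1[i])
--             i += 1
--             k2.append(' ')
--             k3.append('*')
--         elif a == 'R':
--             k1.append(d1[i])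
--             i += 1
--             k2.append(d2[j])
--             j += 1
--             k3.append('-')
--         else:
--             k1.append(d1[i])
--             i += 1
--             k2.append(d2[j])
--             j += 1
--             k3.append('+')
--
--     return [''.join(s) for s in [k1, k2, k3]]
-- ===== SOURCE B (Python) =====
-- def align_plan(d1, d2, copy, replace, insert, delete):
--     # DP whose cells carry (cost, plan) where plan is a shared persistent
--     # cons-chain of moves: no action table, no traceback, rolling rows.
--     prev = [(0, None)]
--     for _ in d2:
--         c, p = prev[-1]
--         prev.append((c + insert, ('I', p)))
--     for c1 in d1:
--         c0, p0 = prev[0]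
--         curr = [(c0 + delete, ('D', p0))]
--         diag = prev[0]
--         for c2, up in zip(d2, prev[1:]):
--             best = (diag[0] + replace, ('R', diag[1]))
--             left = curr[-1]
--             if left[0] + insert < best[0]:
--                 best = (left[0] + insert, ('I', left[1]))
--             if up[0] + delete < best[0]:
--                 best = (up[0] + delete, ('D', up[1]))
--             if c1 == c2 and diag[0] + copy < best[0]:
--                 best = (diag[0] + copy, ('C', diag[1]))
--             curr.append(best)
--             diag = up
--         prev = curr
--     # unwind the chain (last move first), then reverse into forward order
--     moves = []
--     node = prev[-1][1]
--     while node is not None: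
--         moves.append(node[0])
--         node = node[1]
--     moves.reverse()
--     # render by consuming the two strings with iterators
--     it1, it2 = iter(d1), iter(d2)
--     k1, k2, k3 = [], [], []
--     for a in moves:
--         if a == 'I':
--             k1.append(' '); k2.append(next(it2)); k3.append('*')
--         elif a == 'D':
--             k1.append(next(it1)); k2.append(' '); k3.append('*')
--         else:
--             k1.append(next(it1)); k2.append(next(it2)); k3.append('-' if a == 'R' else '+')
--     return [''.join(k1), ''.join(k2), ''.join(k3)]
-- ===== Notes on version B (the rewrite author's own statement) =====
-- stated objective: alternative
-- what changed: B replaces A's three-phase algorithm (fill cost+action matrices, backward traceback over the action table, reverse the move list) by a single forward DP whose cells carry (cost, plan) pairs with the plan as a shared persistent cons-chain, kept in a rolling row instead of full matrices, and renders the output by consuming the two strings with iterators instead of index counters into padded lists.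
import Mathlib
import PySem

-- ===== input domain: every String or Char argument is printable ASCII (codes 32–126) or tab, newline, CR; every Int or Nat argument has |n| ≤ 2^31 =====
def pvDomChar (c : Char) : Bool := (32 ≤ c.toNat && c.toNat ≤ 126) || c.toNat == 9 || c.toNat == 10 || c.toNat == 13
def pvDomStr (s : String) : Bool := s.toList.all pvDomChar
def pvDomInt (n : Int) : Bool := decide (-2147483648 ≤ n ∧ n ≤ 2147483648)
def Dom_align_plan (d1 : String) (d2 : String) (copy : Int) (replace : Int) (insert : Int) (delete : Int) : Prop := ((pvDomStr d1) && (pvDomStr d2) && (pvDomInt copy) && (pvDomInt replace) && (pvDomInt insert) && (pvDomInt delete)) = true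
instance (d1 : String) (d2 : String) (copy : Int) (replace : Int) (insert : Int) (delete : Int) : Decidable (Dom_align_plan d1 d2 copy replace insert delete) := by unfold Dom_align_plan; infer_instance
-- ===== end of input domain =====

set_option maxHeartbeats 1000000


-- B replaces A's three-phase algorithm (cost+action tables, backward traceback, reversal) by a
-- single DP whose cells carry (cost, plan) pairs with the plan as a shared persistent cons-chain,
-- kept in a rolling row; rendering consumes the input strings directly (objective: alternative).

-- Matrices are List (List α), exactly Python's list of lists.  dp[i][j] and dp[i][j] = v are
-- pvGet2 / pvSet2; every index A's Python code uses is nonnegative and in range, where .toNat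
-- and the getD defaults are exact.
def pvGet2 {α : Type} (m : List (List α)) (i j : Int) (d : α) : α :=
  (m.getD i.toNat []).getD j.toNat d
def pvSet2 {α : Type} (m : List (List α)) (i j : Int) (v : α) : List (List α) :=
  m.set i.toNat ((m.getD i.toNat []).set j.toNat v)

-- ===== PORT A =====
-- the body of A's inner loop: sequential writes to dp[i][j] / action[i][j]
def aCell (l1 l2 : List String) (cp rp ins dl : Int) (i j : Int)
    (st : List (List Int) × List (List (Option String))) :
    List (List Int) × List (List (Option String)) :=
  let c_replace := pvGet2 st.1 (i-1) (j-1) 0 + rp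
  let st1 := (pvSet2 st.1 i j c_replace, pvSet2 st.2 i j (some "R"))
  let c_insert := pvGet2 st1.1 i (j-1) 0 + ins
  let st2 := if c_insert < pvGet2 st1.1 i j 0 then (pvSet2 st1.1 i j c_insert, pvSet2 st1.2 i j (some "I")) else st1
  let c_delete := pvGet2 st2.1 (i-1) j 0 + dl
  let st3 := if c_delete < pvGet2 st2.1 i j 0 then (pvSet2 st2.1 i j c_delete, pvSet2 st2.2 i j (some "D")) else st2
  if PySem.List.pyGetD l1 i "" = PySem.List.pyGetD l2 j "" then
    (if pvGet2 st3.1 (i-1) (j-1) 0 + cp < pvGet2 st3.1 i j 0 then (pvSet2 st3.1 i j (pvGet2 st3.1 (i-1) (j-1) 0 + cp), pvSet2 st3.2 i j (some "C")) else st3)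
  else st3

-- A's 'while i > 0 or j > 0' traceback over the action table; fuel m+n+1 bounds the loop
-- (each iteration decreases i+j by one, so Python's loop takes at most m+n iterations)
def aTrace (act : List (List (Option String))) : Nat → Int → Int → List (Option String) → List (Option String)
  | 0, _, _, acc => acc
  | fuel+1, i, j, acc =>
    if 0 < i ∨ 0 < j then
      let a := pvGet2 act i j none
      let acc' := acc ++ [a]
      if a = some "C" ∨ a = some "R" then aTrace act fuel (i-1) (j-1) acc'
      else if a = some "I" then aTrace act fuel i (j-1) acc'
      else aTrace act fuel (i-1) j acc'
    else acc

-- A's rendering loop: three parallel append lists k1, k2, k3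
def aRenderStep (l1 l2 : List String)
    (st : Int × Int × List String × List String × List String) (a : Option String) :
    Int × Int × List String × List String × List String :=
  if a = some "I" then (st.1, st.2.1 + 1, st.2.2.1 ++ [" "], st.2.2.2.1 ++ [PySem.List.pyGetD l2 st.2.1 ""], st.2.2.2.2 ++ ["*"])
  else if a = some "D" then (st.1 + 1, st.2.1, st.2.2.1 ++ [PySem.List.pyGetD l1 st.1 ""], st.2.2.2.1 ++ [" "], st.2.2.2.2 ++ ["*"])
  else if a = some "R" then (st.1 + 1, st.2.1 + 1, st.2.2.1 ++ [PySem.List.pyGetD l1 st.1 ""], st.2.2.2.1 ++ [PySem.List.pyGetD l2 st.2.1 ""], st.2.2.2.2 ++ ["-"])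
  else (st.1 + 1, st.2.1 + 1, st.2.2.1 ++ [PySem.List.pyGetD l1 st.1 ""], st.2.2.2.1 ++ [PySem.List.pyGetD l2 st.2.1 ""], st.2.2.2.2 ++ ["+"])

def align_plan (d1 : String) (d2 : String) (copy : Int) (replace : Int) (insert : Int) (delete : Int) : List String :=
  let m := PySem.Str.len d1
  let n := PySem.Str.len d2
  let l1 : List String := "" :: d1.toList.map (fun c => String.ofList [c])
  let l2 : List String := "" :: d2.toList.map (fun c => String.ofList [c])
  let st0 : List (List Int) × List (List (Option String)) :=
    (List.replicate (m+1).toNat (List.replicate (n+1).toNat 0),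
     List.replicate (m+1).toNat (List.replicate (n+1).toNat none))
  let st1 := (PySem.List.pyRange 1 (n+1) 1).foldl
    (fun st i => (pvSet2 st.1 0 i (pvGet2 st.1 0 (i-1) 0 + insert), pvSet2 st.2 0 i (some "I"))) st0
  let st2 := (PySem.List.pyRange 1 (m+1) 1).foldl
    (fun st i => (pvSet2 st.1 i 0 (pvGet2 st.1 (i-1) 0 0 + delete), pvSet2 st.2 i 0 (some "D"))) st1
  let st3 := (PySem.List.pyRange 1 (m+1) 1).foldl
    (fun st i => (PySem.List.pyRange 1 (n+1) 1).foldl (fun st j => aCell l1 l2 copy replace insert delete i j st) st) st2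
  let acts := (aTrace st3.2 ((m+n).toNat + 1) m n []).reverse
  let fin := acts.foldl (aRenderStep l1 l2) (1, 1, ([] : List String), ([] : List String), ([] : List String))
  [PySem.Str.join "" fin.2.2.1, PySem.Str.join "" fin.2.2.2.1, PySem.Str.join "" fin.2.2.2.2]

-- ===== PORT B =====
-- B's cell: the comparison ladder on (cost, plan) pairs; a plan is a cons-chain of moves,
-- most recent move first (Python's ('R', parent) tuple chain is this List with [] for None)
def bBest (eqc : Bool) (cp rp ins dl : Int) (diag left up : Int × List String) : Int × List String :=
  let b0 := (diag.1 + rp, "R" :: diag.2)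
  let b1 := if left.1 + ins < b0.1 then (left.1 + ins, "I" :: left.2) else b0
  let b2 := if up.1 + dl < b1.1 then (up.1 + dl, "D" :: up.2) else b1
  if eqc = true ∧ diag.1 + cp < b2.1 then (diag.1 + cp, "C" :: diag.2) else b2

-- B's inner loop: walk the previous row (diag, up) and d2 in lockstep, carrying curr's last cell
def bRowAux (c1 : Char) (cp rp ins dl : Int) :
    (Int × List String) → (Int × List String) → List Char → List (Int × List String) → List (Int × List String)
  | diag, left, c2 :: cs, up :: rest =>
      let b := bBest (c1 == c2) cp rp ins dl diag left up
      b :: bRowAux c1 cp rp ins dl up b cs rest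
  | _, _, _, _ => []

-- B's outer loop body: build row i from row i-1
def bRow (c1 : Char) (cp rp ins dl : Int) (s2 : List Char) (prev : List (Int × List String)) :
    List (Int × List String) :=
  match prev with
  | [] => []
  | p0 :: rest =>
      let first := (p0.1 + dl, "D" :: p0.2)
      first :: bRowAux c1 cp rp ins dl p0 first s2 rest

-- B's row 0: repeated append of (last cost + insert, 'I' chained on the last plan)
def bRow0 (ins : Int) (s2 : List Char) : List (Int × List String) :=
  s2.foldl (fun acc _ => acc ++ [((acc.getLastD (0, [])).1 + ins, "I" :: (acc.getLastD (0, [])).2)])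
    [((0 : Int), ([] : List String))]

-- B's unwind loop: read the cons-chain off into a list (append per node, as the Python loop does)
def bUnwind : List String → List String → List String
  | [], acc => acc
  | a :: rest, acc => bUnwind rest (acc ++ [a])

-- B's rendering loop: consume the two strings with iterators (next(it) = headD/tail here,
-- exact because the move list never asks for a character past either end)
def bRender : List String → List Char → List Char → List Char × List Char × List Char
  | [], _, _ => ([], [], [])
  | a :: ms, s1, s2 =>
    if a = "I" then
      let r := bRender ms s1 s2.tail
      (' ' :: r.1, s2.headD ' ' :: r.2.1, '*' :: r.2.2)
    else if a = "D" then
      let r := bRender ms s1.tail s2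
      (s1.headD ' ' :: r.1, ' ' :: r.2.1, '*' :: r.2.2)
    else
      let r := bRender ms s1.tail s2.tail
      (s1.headD ' ' :: r.1, s2.headD ' ' :: r.2.1, (if a = "R" then '-' else '+') :: r.2.2)

def align_plan_alt (d1 : String) (d2 : String) (copy : Int) (replace : Int) (insert : Int) (delete : Int) : List String :=
  let s1 := d1.toList
  let s2 := d2.toList
  let fin := s1.foldl (fun prev c1 => bRow c1 copy replace insert delete s2 prev) (bRow0 insert s2)
  let moves := (bUnwind (fin.getLastD (0, [])).2 []).reverse
  let r := bRender moves s1 s2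
  [String.ofList r.1, String.ofList r.2.1, String.ofList r.2.2]

-- ===== PRECONDITION & SPEC =====
def Spec_align_plan (d1 : String) (d2 : String) (copy : Int) (replace : Int) (insert : Int) (delete : Int) (out : List String) : Prop := out = align_plan_alt d1 d2 copy replace insert delete
instance (d1 : String) (d2 : String) (copy : Int) (replace : Int) (insert : Int) (delete : Int) (out : List String) : Decidable (Spec_align_plan d1 d2 copy replace insert delete out) := by unfold Spec_align_plan; infer_instance

-- ===== CLAIM (what is proved, stated in full; the proofs are below) =====
def Claim_equal_align_plan : Prop := ∀ (d1 : String) (d2 : String) (copy : Int) (replace : Int) (insert : Int) (delete : Int), Dom_align_plan d1 d2 copy replace insert delete → Spec_align_plan d1 d2 copy replace insert delete (align_plan d1 d2 copy replace insert delete)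

-- ===== LEMMAS AND PROOFS =====

-- basic facts about the shared 2-D accessors
theorem getD_set_self {α : Type} (l : List α) (n : Nat) (v d : α) (h : n < l.length) :
    (l.set n v).getD n d = v := by
  rw [List.getD_eq_getElem?_getD, List.getElem?_set_self (by simpa using h)]
  rfl

theorem getD_set_ne {α : Type} (l : List α) (n m : Nat) (v d : α) (h : ¬ m = n) :
    (l.set n v).getD m d = l.getD m d := by
  rw [List.getD_eq_getElem?_getD, List.getElem?_set_ne (by omega), ← List.getD_eq_getElem?_getD]

theorem pvGet2_set2_same {α : Type} (m : List (List α)) (i j : Int) (v d : α)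
    (hI : i.toNat < m.length) (hJ : j.toNat < (m.getD i.toNat []).length) :
    pvGet2 (pvSet2 m i j v) i j d = v := by
  unfold pvGet2 pvSet2
  rw [getD_set_self _ _ _ _ hI, getD_set_self _ _ _ _ hJ]

theorem pvGet2_set2_ne {α : Type} (m : List (List α)) (i j p q : Int) (v d : α)
    (h : ¬(p.toNat = i.toNat ∧ q.toNat = j.toNat)) :
    pvGet2 (pvSet2 m i j v) p q d = pvGet2 m p q d := by
  unfold pvGet2 pvSet2
  by_cases hp : p.toNat = i.toNat
  · have hq : ¬ q.toNat = j.toNat := fun hq => h ⟨hp, hq⟩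
    rw [hp]
    by_cases hl : i.toNat < m.length
    · rw [getD_set_self _ _ _ _ hl, getD_set_ne _ _ _ _ _ hq]
    · rw [List.set_eq_of_length_le (by omega)]
  · rw [getD_set_ne _ _ _ _ _ hp]

theorem pvSet2_set2 {α : Type} (m : List (List α)) (i j : Int) (a b : α) :
    pvSet2 (pvSet2 m i j a) i j b = pvSet2 m i j b := by
  unfold pvSet2
  by_cases hl : i.toNat < m.length
  · rw [List.set_set, getD_set_self _ _ _ _ hl, List.set_set]
  · have e : m.set i.toNat ((m.getD i.toNat []).set j.toNat a) = m :=
      List.set_eq_of_length_le (by omega)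
    rw [e]

def pvShape {α : Type} (M N : Nat) (m : List (List α)) : Prop :=
  m.length = M + 1 ∧ ∀ r ∈ m, r.length = N + 1

theorem pvShape_rowlen {α : Type} {M N : Nat} {m : List (List α)} (h : pvShape M N m)
    (p : Nat) (hp : p < M + 1) : (m.getD p []).length = N + 1 := by
  obtain ⟨hlen, hrow⟩ := h
  have hpl : p < m.length := by omega
  rw [List.getD_eq_getElem?_getD, List.getElem?_eq_getElem hpl]
  exact hrow _ (List.getElem_mem hpl)

theorem pvShape_set2 {α : Type} {M N : Nat} {m : List (List α)} (i j : Int) (v : α)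
    (h : pvShape M N m) : pvShape M N (pvSet2 m i j v) := by
  obtain ⟨hlen, hrow⟩ := h
  by_cases hl : i.toNat < m.length
  · refine ⟨by simp [pvSet2, hlen], ?_⟩
    intro r hr
    rcases List.mem_or_eq_of_mem_set hr with hmem | heq
    · exact hrow r hmem
    · subst heq
      rw [List.length_set, List.getD_eq_getElem?_getD, List.getElem?_eq_getElem hl]
      exact hrow _ (List.getElem_mem hl)
  · unfold pvSet2
    rw [List.set_eq_of_length_le (by omega)]
    exact ⟨hlen, hrow⟩

theorem pvShape_replicate {α : Type} (M N : Nat) (x : α) :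
    pvShape M N (List.replicate (M+1) (List.replicate (N+1) x)) := by
  constructor
  · simp
  · intro r hr
    rw [List.eq_of_mem_replicate hr]
    simp

-- folding a pair step whose first component ignores the second projects to a fold on the first
theorem pvFoldFst {α β γ : Type} (L : List γ) (F : α × β → γ → α × β) (f : α → γ → α)
    (h : ∀ st x, (F st x).1 = f st.1 x) : ∀ st : α × β, (L.foldl F st).1 = L.foldl f st.1 := by
  induction L with
  | nil => intro st; rfl
  | cons x t ih => intro st; simp only [List.foldl_cons]; rw [ih, h]

-- a fold preserves an invariant
theorem pvFoldInv {σ γ : Type} (P : σ → Prop) (L : List γ) (f : σ → γ → σ)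
    (h : ∀ s x, x ∈ L → P s → P (f s x)) : ∀ s, P s → P (L.foldl f s) := by
  induction L with
  | nil => intro s hs; exact hs
  | cons x t ih =>
    intro s hs
    simp only [List.foldl_cons]
    exact ih (fun s y hy => h s y (List.mem_cons_of_mem _ hy)) _ (h s x List.mem_cons_self hs)

-- invariant-aware projection of a pair fold
theorem pvFoldFstInv {α β γ : Type} (P : α × β → Prop) (L : List γ) (F : α × β → γ → α × β)
    (f : α → γ → α)
    (hP : ∀ st x, x ∈ L → P st → P (F st x))
    (h : ∀ st x, x ∈ L → P st → (F st x).1 = f st.1 x) :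
    ∀ st, P st → (L.foldl F st).1 = L.foldl f st.1 := by
  induction L with
  | nil => intro st _; rfl
  | cons x t ih =>
    intro st hst
    simp only [List.foldl_cons]
    rw [ih (fun s y hy => hP s y (List.mem_cons_of_mem _ hy))
        (fun s y hy => h s y (List.mem_cons_of_mem _ hy)) _ (hP st x List.mem_cons_self hst),
      h st x List.mem_cons_self hst]

theorem pvRange_succ (c : Nat) :
    PySem.List.pyRange 1 (1 + ((c+1 : Nat) : Int)) 1 = PySem.List.pyRange 1 (1 + (c : Int)) 1 ++ [1 + (c : Int)] := by
  have h : (1 + ((c+1 : Nat) : Int)) = (1 + (c : Int)) + 1 := by push_cast; ring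
  rw [h, PySem.List.pyRange_one_succ_right (by omega)]

theorem pvRangeNil : ∀ (z : Nat), z = 0 → PySem.List.pyRange 1 (1 + (z : Int)) 1 = [] := by
  intro z hz; subst hz; exact PySem.List.pyRange_one_eq_nil (by simp)

-- ghost cost-only fill (proof device): the single dp[i][j] write A's cell body amounts to
def gCell (l1 l2 : List String) (cp rp ins dl : Int) (i j : Int) (dp : List (List Int)) : List (List Int) :=
  let best0 := pvGet2 dp (i-1) (j-1) 0 + rp
  let best1 := if pvGet2 dp i (j-1) 0 + ins < best0 then pvGet2 dp i (j-1) 0 + ins else best0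
  let best2 := if pvGet2 dp (i-1) j 0 + dl < best1 then pvGet2 dp (i-1) j 0 + dl else best1
  let best3 := if PySem.List.pyGetD l1 i "" = PySem.List.pyGetD l2 j "" ∧ pvGet2 dp (i-1) (j-1) 0 + cp < best2 then pvGet2 dp (i-1) (j-1) 0 + cp else best2
  pvSet2 dp i j best3

-- the move A's stored action amounts to: the same ladder re-run on dp neighbours (proof device)
def bMove (dp : List (List Int)) (l1 l2 : List String) (cp rp ins dl : Int) (i j : Int) : String :=
  if i = 0 then "I"
  else if j = 0 then "D"
  else
    let ab0 := ("R", pvGet2 dp (i-1) (j-1) 0 + rp)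
    let ab1 := if pvGet2 dp i (j-1) 0 + ins < ab0.2 then ("I", pvGet2 dp i (j-1) 0 + ins) else ab0
    let ab2 := if pvGet2 dp (i-1) j 0 + dl < ab1.2 then ("D", pvGet2 dp (i-1) j 0 + dl) else ab1
    if PySem.List.pyGetD l1 i "" = PySem.List.pyGetD l2 j "" ∧ pvGet2 dp (i-1) (j-1) 0 + cp < ab2.2 then "C" else ab2.1

-- both cell bodies write only cell (i, j), and they write the same dp value
theorem aCell_shape {M N : Nat} (l1 l2 : List String) (cp rp ins dl : Int) (i j : Int)
    (st : List (List Int) × List (List (Option String)))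
    (h : pvShape M N st.1 ∧ pvShape M N st.2) :
    pvShape M N (aCell l1 l2 cp rp ins dl i j st).1 ∧ pvShape M N (aCell l1 l2 cp rp ins dl i j st).2 := by
  obtain ⟨h1, h2⟩ := h
  simp only [aCell]
  split_ifs <;> refine ⟨?_, ?_⟩ <;> (repeat' apply pvShape_set2) <;> first | exact h1 | exact h2

theorem aCell_fst {M N : Nat} (l1 l2 : List String) (cp rp ins dl : Int) (i j : Int)
    (hi1 : 1 ≤ i) (hi2 : i ≤ (M : Int)) (hj1 : 1 ≤ j) (hj2 : j ≤ (N : Int))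
    (st : List (List Int) × List (List (Option String))) (hs : pvShape M N st.1) :
    (aCell l1 l2 cp rp ins dl i j st).1 = gCell l1 l2 cp rp ins dl i j st.1 := by
  have hIL : i.toNat < st.1.length := by obtain ⟨hlen, _⟩ := hs; omega
  have hRL : (st.1.getD i.toNat []).length = N + 1 := pvShape_rowlen hs _ (by omega)
  have hJL : j.toNat < (st.1.getD i.toNat []).length := by omega
  have eS : ∀ (v d : Int), pvGet2 (pvSet2 st.1 i j v) i j d = v :=
    fun v d => pvGet2_set2_same st.1 i j v d hIL hJL
  have eN1 : ∀ (mm : List (List Int)) (v d : Int), pvGet2 (pvSet2 mm i j v) i (j-1) d = pvGet2 mm i (j-1) d :=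
    fun mm v d => pvGet2_set2_ne mm i j i (j-1) v d (by omega)
  have eN2 : ∀ (mm : List (List Int)) (v d : Int), pvGet2 (pvSet2 mm i j v) (i-1) j d = pvGet2 mm (i-1) j d :=
    fun mm v d => pvGet2_set2_ne mm i j (i-1) j v d (by omega)
  have eN3 : ∀ (mm : List (List Int)) (v d : Int), pvGet2 (pvSet2 mm i j v) (i-1) (j-1) d = pvGet2 mm (i-1) (j-1) d :=
    fun mm v d => pvGet2_set2_ne mm i j (i-1) (j-1) v d (by omega)
  simp only [aCell, gCell]
  simp [pvSet2_set2, eS, eN1, eN2, eN3]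
  split_ifs <;> simp_all [pvSet2_set2, eS, eN1, eN2, eN3] <;> omega

theorem aCell_snd_ne (l1 l2 : List String) (cp rp ins dl : Int) (i j p q : Int)
    (st : List (List Int) × List (List (Option String)))
    (h : ¬(p.toNat = i.toNat ∧ q.toNat = j.toNat)) :
    pvGet2 (aCell l1 l2 cp rp ins dl i j st).2 p q none = pvGet2 st.2 p q none := by
  have eA : ∀ (mm : List (List (Option String))) (v : Option String),
      pvGet2 (pvSet2 mm i j v) p q none = pvGet2 mm p q none :=
    fun mm v => pvGet2_set2_ne mm i j p q v none h
  simp only [aCell]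
  split_ifs <;> simp [eA]

theorem gCell_ne (l1 l2 : List String) (cp rp ins dl : Int) (i j p q : Int)
    (dp : List (List Int)) (h : ¬(p.toNat = i.toNat ∧ q.toNat = j.toNat)) :
    pvGet2 (gCell l1 l2 cp rp ins dl i j dp) p q 0 = pvGet2 dp p q 0 := by
  simp only [gCell]
  exact pvGet2_set2_ne dp i j p q _ 0 h

theorem bMove_congr (dp dp' : List (List Int)) (l1 l2 : List String) (cp rp ins dl : Int) (i j : Int)
    (h1 : pvGet2 dp (i-1) (j-1) 0 = pvGet2 dp' (i-1) (j-1) 0)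
    (h2 : pvGet2 dp i (j-1) 0 = pvGet2 dp' i (j-1) 0)
    (h3 : pvGet2 dp (i-1) j 0 = pvGet2 dp' (i-1) j 0) :
    bMove dp l1 l2 cp rp ins dl i j = bMove dp' l1 l2 cp rp ins dl i j := by
  simp only [bMove, h1, h2, h3]

theorem aCell_act_self {M N : Nat} (l1 l2 : List String) (cp rp ins dl : Int) (i j : Int)
    (hi1 : 1 ≤ i) (hi2 : i ≤ (M : Int)) (hj1 : 1 ≤ j) (hj2 : j ≤ (N : Int))
    (st : List (List Int) × List (List (Option String)))
    (hs1 : pvShape M N st.1) (hs2 : pvShape M N st.2) :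
    pvGet2 (aCell l1 l2 cp rp ins dl i j st).2 i j none = some (bMove st.1 l1 l2 cp rp ins dl i j) := by
  have hIL : i.toNat < st.1.length := by obtain ⟨hlen, _⟩ := hs1; omega
  have hRL : (st.1.getD i.toNat []).length = N + 1 := pvShape_rowlen hs1 _ (by omega)
  have hJL : j.toNat < (st.1.getD i.toNat []).length := by omega
  have hIL2 : i.toNat < st.2.length := by obtain ⟨hlen, _⟩ := hs2; omega
  have hRL2 : (st.2.getD i.toNat []).length = N + 1 := pvShape_rowlen hs2 _ (by omega)
  have hJL2 : j.toNat < (st.2.getD i.toNat []).length := by omega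
  have eS : ∀ (v d : Int), pvGet2 (pvSet2 st.1 i j v) i j d = v :=
    fun v d => pvGet2_set2_same st.1 i j v d hIL hJL
  have eS2 : ∀ (v : Option String), pvGet2 (pvSet2 st.2 i j v) i j none = v :=
    fun v => pvGet2_set2_same st.2 i j v none hIL2 hJL2
  have eN1 : ∀ (mm : List (List Int)) (v d : Int), pvGet2 (pvSet2 mm i j v) i (j-1) d = pvGet2 mm i (j-1) d :=
    fun mm v d => pvGet2_set2_ne mm i j i (j-1) v d (by omega)
  have eN2 : ∀ (mm : List (List Int)) (v d : Int), pvGet2 (pvSet2 mm i j v) (i-1) j d = pvGet2 mm (i-1) j d :=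
    fun mm v d => pvGet2_set2_ne mm i j (i-1) j v d (by omega)
  have eN3 : ∀ (mm : List (List Int)) (v d : Int), pvGet2 (pvSet2 mm i j v) (i-1) (j-1) d = pvGet2 mm (i-1) (j-1) d :=
    fun mm v d => pvGet2_set2_ne mm i j (i-1) (j-1) v d (by omega)
  have hi0 : ¬ i = 0 := by omega
  have hj0 : ¬ j = 0 := by omega
  simp only [aCell, bMove]
  simp [pvSet2_set2, eS, eS2, eN1, eN2, eN3, hi0, hj0]
  split_ifs <;> simp_all [pvSet2_set2, eS, eS2, eN1, eN2, eN3] <;> omega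

-- the inner fold of ghost cells changes no cell outside row i, columns 1..c
theorem gInnerPres (l1 l2 : List String) (cp rp ins dl : Int) (i : Int) (hi : 1 ≤ i) (c : Nat) :
    ∀ (dp : List (List Int)) (p q : Int), 0 ≤ p → 0 ≤ q → ¬(p = i ∧ 1 ≤ q ∧ q ≤ (c : Int)) →
    pvGet2 ((PySem.List.pyRange 1 (1 + (c : Int)) 1).foldl (fun dp j => gCell l1 l2 cp rp ins dl i j dp) dp) p q 0
      = pvGet2 dp p q 0 := by
  induction c with
  | zero =>
    intro dp p q _ _ h
    rw [pvRangeNil 0 rfl]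
    rfl
  | succ c ih =>
    intro dp p q hp hq h
    rw [pvRange_succ, List.foldl_append]
    simp only [List.foldl_cons, List.foldl_nil]
    rw [gCell_ne _ _ _ _ _ _ _ _ _ _ _ (by push_cast at h; omega)]
    exact ih dp p q hp hq (by rintro ⟨ha, hb, hc⟩; exact h ⟨ha, hb, by push_cast; omega⟩)

-- a row of A's cells preserves the shape of both matrices
theorem aRowShape {M N : Nat} (l1 l2 : List String) (cp rp ins dl : Int) (i : Int) (C : List Int) :
    ∀ (st : List (List Int) × List (List (Option String))),
    pvShape M N st.1 ∧ pvShape M N st.2 →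
    pvShape M N (C.foldl (fun st j => aCell l1 l2 cp rp ins dl i j st) st).1 ∧
    pvShape M N (C.foldl (fun st j => aCell l1 l2 cp rp ins dl i j st) st).2 :=
  pvFoldInv _ C _ (fun st x _ h => aCell_shape l1 l2 cp rp ins dl i x st h)

-- A's inner fold: action outside row i unchanged; inside, the stored action is the re-derived move
theorem innerAct {M N : Nat} (l1 l2 : List String) (cp rp ins dl : Int) (i : Int)
    (hi1 : 1 ≤ i) (hi2 : i ≤ (M : Int)) (c : Nat) (hc : c ≤ N) :
    ∀ (st : List (List Int) × List (List (Option String))),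
    pvShape M N st.1 → pvShape M N st.2 →
    (∀ p q, 0 ≤ p → 0 ≤ q → ¬(p = i ∧ 1 ≤ q ∧ q ≤ (c : Int)) →
      pvGet2 ((PySem.List.pyRange 1 (1 + (c : Int)) 1).foldl (fun st j => aCell l1 l2 cp rp ins dl i j st) st).2 p q none
        = pvGet2 st.2 p q none) ∧
    (∀ q, 1 ≤ q → q ≤ (c : Int) →
      pvGet2 ((PySem.List.pyRange 1 (1 + (c : Int)) 1).foldl (fun st j => aCell l1 l2 cp rp ins dl i j st) st).2 i q none
        = some (bMove ((PySem.List.pyRange 1 (1 + (c : Int)) 1).foldl (fun st j => aCell l1 l2 cp rp ins dl i j st) st).1 l1 l2 cp rp ins dl i q)) := by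
  induction c with
  | zero =>
    intro st _ _
    rw [pvRangeNil 0 rfl]
    exact ⟨fun p q _ _ h => rfl, fun q h1 h2 => absurd (h1.trans h2) (by simp)⟩
  | succ c ih =>
    intro st hs1 hs2
    rw [pvRange_succ, List.foldl_append]
    simp only [List.foldl_cons, List.foldl_nil]
    obtain ⟨ih1, ih2⟩ := ih (by omega) st hs1 hs2
    obtain ⟨hsh1, hsh2⟩ := aRowShape (M := M) (N := N) l1 l2 cp rp ins dl i
      (PySem.List.pyRange 1 (1 + (c : Int)) 1) st ⟨hs1, hs2⟩
    constructor
    · intro p q hp hq h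
      rw [aCell_snd_ne _ _ _ _ _ _ _ _ _ _ _ (by push_cast at h; omega)]
      exact ih1 p q hp hq (by rintro ⟨ha, hb, hcc⟩; exact h ⟨ha, hb, by push_cast; omega⟩)
    · intro q h1 h2
      by_cases hq : q = 1 + (c : Int)
      · subst hq
        rw [aCell_act_self (M := M) (N := N) _ _ _ _ _ _ _ _ hi1 hi2 (by omega) (by push_cast at h2 ⊢; omega) _ hsh1 hsh2]
        exact congrArg some (bMove_congr _ _ _ _ _ _ _ _ _ _
          (by rw [aCell_fst (M := M) (N := N) _ _ _ _ _ _ _ _ hi1 hi2 (by omega) (by push_cast at h2 ⊢; omega) _ hsh1,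
                gCell_ne _ _ _ _ _ _ _ _ _ _ _ (by omega)])
          (by rw [aCell_fst (M := M) (N := N) _ _ _ _ _ _ _ _ hi1 hi2 (by omega) (by push_cast at h2 ⊢; omega) _ hsh1,
                gCell_ne _ _ _ _ _ _ _ _ _ _ _ (by omega)])
          (by rw [aCell_fst (M := M) (N := N) _ _ _ _ _ _ _ _ hi1 hi2 (by omega) (by push_cast at h2 ⊢; omega) _ hsh1,
                gCell_ne _ _ _ _ _ _ _ _ _ _ _ (by omega)]))
      · have hq2 : q ≤ (c : Int) := by push_cast at h2; omega
        rw [aCell_snd_ne _ _ _ _ _ _ _ _ _ _ _ (by omega)]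
        rw [ih2 q h1 hq2]
        exact congrArg some (bMove_congr _ _ _ _ _ _ _ _ _ _
          (by rw [aCell_fst (M := M) (N := N) _ _ _ _ _ _ _ _ hi1 hi2 (by omega) (by push_cast; omega) _ hsh1,
                gCell_ne _ _ _ _ _ _ _ _ _ _ _ (by omega)])
          (by rw [aCell_fst (M := M) (N := N) _ _ _ _ _ _ _ _ hi1 hi2 (by omega) (by push_cast; omega) _ hsh1,
                gCell_ne _ _ _ _ _ _ _ _ _ _ _ (by omega)])
          (by rw [aCell_fst (M := M) (N := N) _ _ _ _ _ _ _ _ hi1 hi2 (by omega) (by push_cast; omega) _ hsh1,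
                gCell_ne _ _ _ _ _ _ _ _ _ _ _ (by omega)]))

-- A's inner fold projects to the ghost inner fold on the dp component
theorem innerFst {M N : Nat} (l1 l2 : List String) (cp rp ins dl : Int) (i : Int)
    (hi1 : 1 ≤ i) (hi2 : i ≤ (M : Int)) (c : Nat) (hc : c ≤ N) :
    ∀ (st : List (List Int) × List (List (Option String))),
    pvShape M N st.1 ∧ pvShape M N st.2 →
    ((PySem.List.pyRange 1 (1 + (c : Int)) 1).foldl (fun st j => aCell l1 l2 cp rp ins dl i j st) st).1
      = (PySem.List.pyRange 1 (1 + (c : Int)) 1).foldl (fun dp j => gCell l1 l2 cp rp ins dl i j dp) st.1 :=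
  pvFoldFstInv _ _ _ _
    (fun st x _ h => aCell_shape l1 l2 cp rp ins dl i x st h)
    (fun st x hx h => by
      have hb := PySem.List.mem_pyRange_one.mp hx
      exact aCell_fst (M := M) (N := N) l1 l2 cp rp ins dl i x hi1 hi2 (by omega) (by push_cast at hb ⊢; omega) st h.1)

-- A's main double fold: actions outside the filled region unchanged; inside, stored = re-derived
theorem outerAct {M N : Nat} (l1 l2 : List String) (cp rp ins dl : Int) (r : Nat) (hr : r ≤ M) :
    ∀ (st : List (List Int) × List (List (Option String))),
    pvShape M N st.1 → pvShape M N st.2 →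
    (∀ p q, 0 ≤ p → 0 ≤ q → ¬(1 ≤ p ∧ p ≤ (r : Int) ∧ 1 ≤ q ∧ q ≤ (N : Int)) →
      pvGet2 ((PySem.List.pyRange 1 (1 + (r : Int)) 1).foldl
        (fun st i => (PySem.List.pyRange 1 (1 + (N : Int)) 1).foldl (fun st j => aCell l1 l2 cp rp ins dl i j st) st) st).2 p q none
        = pvGet2 st.2 p q none) ∧
    (∀ p q, 1 ≤ p → p ≤ (r : Int) → 1 ≤ q → q ≤ (N : Int) →
      pvGet2 ((PySem.List.pyRange 1 (1 + (r : Int)) 1).foldl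
        (fun st i => (PySem.List.pyRange 1 (1 + (N : Int)) 1).foldl (fun st j => aCell l1 l2 cp rp ins dl i j st) st) st).2 p q none
        = some (bMove ((PySem.List.pyRange 1 (1 + (r : Int)) 1).foldl
            (fun st i => (PySem.List.pyRange 1 (1 + (N : Int)) 1).foldl (fun st j => aCell l1 l2 cp rp ins dl i j st) st) st).1
            l1 l2 cp rp ins dl p q)) := by
  induction r with
  | zero =>
    intro st _ _
    rw [pvRangeNil 0 rfl]
    exact ⟨fun p q _ _ h => rfl, fun p q h1 h2 _ _ => absurd (h1.trans h2) (by simp)⟩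
  | succ r ih =>
    intro st hs1 hs2
    rw [pvRange_succ, List.foldl_append]
    simp only [List.foldl_cons, List.foldl_nil]
    obtain ⟨ih1, ih2⟩ := ih (by omega) st hs1 hs2
    obtain ⟨hshR1, hshR2⟩ := pvFoldInv
      (fun st => pvShape M N st.1 ∧ pvShape M N st.2)
      (PySem.List.pyRange 1 (1 + (r : Int)) 1) _
      (fun s x _ h => aRowShape (M := M) (N := N) l1 l2 cp rp ins dl x
        (PySem.List.pyRange 1 (1 + (N : Int)) 1) s h) st ⟨hs1, hs2⟩
    have hi1 : (1 : Int) ≤ 1 + (r : Int) := by omega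
    have hi2 : 1 + (r : Int) ≤ (M : Int) := by push_cast; omega
    obtain ⟨in1, in2⟩ := innerAct (M := M) (N := N) l1 l2 cp rp ins dl (1 + (r : Int)) hi1 hi2 N le_rfl
      _ hshR1 hshR2
    constructor
    · intro p q hp hq h
      rw [in1 p q hp hq (by rintro ⟨hpp, hq1, hq2⟩; exact h ⟨by omega, by omega, hq1, hq2⟩)]
      exact ih1 p q hp hq (by rintro ⟨ha, hb, hcc, hd⟩; exact h ⟨ha, by push_cast; omega, hcc, hd⟩)
    · intro p q hp1 hp2 hq1 hq2
      by_cases hp : p = 1 + (r : Int)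
      · subst hp
        exact in2 q hq1 hq2
      · have hp2' : p ≤ (r : Int) := by push_cast at hp2; omega
        rw [in1 p q (by omega) (by omega) (by rintro ⟨hpp, _⟩; exact hp hpp)]
        rw [ih2 p q hp1 hp2' hq1 hq2]
        exact congrArg some (bMove_congr _ _ _ _ _ _ _ _ _ _
          (by rw [innerFst (M := M) (N := N) l1 l2 cp rp ins dl _ hi1 hi2 N le_rfl _ ⟨hshR1, hshR2⟩,
                gInnerPres l1 l2 cp rp ins dl _ hi1 N _ _ _ (by omega) (by omega) (by rintro ⟨ha, _, _⟩; omega)])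
          (by rw [innerFst (M := M) (N := N) l1 l2 cp rp ins dl _ hi1 hi2 N le_rfl _ ⟨hshR1, hshR2⟩,
                gInnerPres l1 l2 cp rp ins dl _ hi1 N _ _ _ (by omega) (by omega) (by rintro ⟨ha, _, _⟩; omega)])
          (by rw [innerFst (M := M) (N := N) l1 l2 cp rp ins dl _ hi1 hi2 N le_rfl _ ⟨hshR1, hshR2⟩,
                gInnerPres l1 l2 cp rp ins dl _ hi1 N _ _ _ (by omega) (by omega) (by rintro ⟨ha, _, _⟩; omega)]))

-- A's first init loop: action row 0 becomes 'I' on columns 1..c, nothing else moves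
theorem initColAct {M N : Nat} (ins : Int) (c : Nat) (hc : c ≤ N) :
    ∀ (st : List (List Int) × List (List (Option String))),
    pvShape M N st.2 →
    (∀ p q, 0 ≤ p → 0 ≤ q → ¬(p = 0 ∧ 1 ≤ q ∧ q ≤ (c : Int)) →
      pvGet2 ((PySem.List.pyRange 1 (1 + (c : Int)) 1).foldl
        (fun st i => (pvSet2 st.1 0 i (pvGet2 st.1 0 (i-1) 0 + ins), pvSet2 st.2 0 i (some "I"))) st).2 p q none
        = pvGet2 st.2 p q none) ∧
    (∀ q, 1 ≤ q → q ≤ (c : Int) →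
      pvGet2 ((PySem.List.pyRange 1 (1 + (c : Int)) 1).foldl
        (fun st i => (pvSet2 st.1 0 i (pvGet2 st.1 0 (i-1) 0 + ins), pvSet2 st.2 0 i (some "I"))) st).2 0 q none
        = some "I") := by
  induction c with
  | zero =>
    intro st _
    rw [pvRangeNil 0 rfl]
    exact ⟨fun p q _ _ h => rfl, fun q h1 h2 => absurd (h1.trans h2) (by simp)⟩
  | succ c ih =>
    intro st hs2
    rw [pvRange_succ, List.foldl_append]
    simp only [List.foldl_cons, List.foldl_nil]
    obtain ⟨ih1, ih2⟩ := ih (by omega) st hs2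
    have hshF : pvShape M N ((PySem.List.pyRange 1 (1 + (c : Int)) 1).foldl
        (fun st i => (pvSet2 st.1 0 i (pvGet2 st.1 0 (i-1) 0 + ins), pvSet2 st.2 0 i (some "I"))) st).2 := by
      exact pvFoldInv (fun st : List (List Int) × List (List (Option String)) => pvShape M N st.2)
        (PySem.List.pyRange 1 (1 + (c : Int)) 1)
        (fun st i => (pvSet2 st.1 0 i (pvGet2 st.1 0 (i-1) 0 + ins), pvSet2 st.2 0 i (some "I")))
        (fun s x _ h => by exact pvShape_set2 _ _ _ h) st hs2
    constructor
    · intro p q hp hq h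
      show pvGet2 (pvSet2 _ 0 (1 + (c : Int)) (some "I")) p q none = pvGet2 st.2 p q none
      rw [pvGet2_set2_ne _ _ _ _ _ _ _ (by push_cast at h; omega)]
      exact ih1 p q hp hq (by rintro ⟨ha, hb, hcc⟩; exact h ⟨ha, hb, by push_cast; omega⟩)
    · intro q h1 h2
      by_cases hq : q = 1 + (c : Int)
      · subst hq
        show pvGet2 (pvSet2 _ 0 (1 + (c : Int)) (some "I")) 0 (1 + (c : Int)) none = some "I"
        refine pvGet2_set2_same _ _ _ _ _ ?_ ?_
        · obtain ⟨hlen, _⟩ := hshF; omega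
        · rw [pvShape_rowlen hshF _ (by omega)]; push_cast at h2; omega
      · have hq2 : q ≤ (c : Int) := by push_cast at h2; omega
        show pvGet2 (pvSet2 _ 0 (1 + (c : Int)) (some "I")) 0 q none = some "I"
        rw [pvGet2_set2_ne _ _ _ _ _ _ _ (by omega)]
        exact ih2 q h1 hq2

-- A's second init loop: action column 0 becomes 'D' on rows 1..c, nothing else moves
theorem initRowAct {M N : Nat} (dl : Int) (c : Nat) (hc : c ≤ M) :
    ∀ (st : List (List Int) × List (List (Option String))),
    pvShape M N st.2 →
    (∀ p q, 0 ≤ p → 0 ≤ q → ¬(1 ≤ p ∧ p ≤ (c : Int) ∧ q = 0) →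
      pvGet2 ((PySem.List.pyRange 1 (1 + (c : Int)) 1).foldl
        (fun st i => (pvSet2 st.1 i 0 (pvGet2 st.1 (i-1) 0 0 + dl), pvSet2 st.2 i 0 (some "D"))) st).2 p q none
        = pvGet2 st.2 p q none) ∧
    (∀ p, 1 ≤ p → p ≤ (c : Int) →
      pvGet2 ((PySem.List.pyRange 1 (1 + (c : Int)) 1).foldl
        (fun st i => (pvSet2 st.1 i 0 (pvGet2 st.1 (i-1) 0 0 + dl), pvSet2 st.2 i 0 (some "D"))) st).2 p 0 none
        = some "D") := by
  induction c with
  | zero =>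
    intro st _
    rw [pvRangeNil 0 rfl]
    exact ⟨fun p q _ _ h => rfl, fun p h1 h2 => absurd (h1.trans h2) (by simp)⟩
  | succ c ih =>
    intro st hs2
    rw [pvRange_succ, List.foldl_append]
    simp only [List.foldl_cons, List.foldl_nil]
    obtain ⟨ih1, ih2⟩ := ih (by omega) st hs2
    have hshF : pvShape M N ((PySem.List.pyRange 1 (1 + (c : Int)) 1).foldl
        (fun st i => (pvSet2 st.1 i 0 (pvGet2 st.1 (i-1) 0 0 + dl), pvSet2 st.2 i 0 (some "D"))) st).2 := by
      exact pvFoldInv (fun st : List (List Int) × List (List (Option String)) => pvShape M N st.2)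
        (PySem.List.pyRange 1 (1 + (c : Int)) 1)
        (fun st i => (pvSet2 st.1 i 0 (pvGet2 st.1 (i-1) 0 0 + dl), pvSet2 st.2 i 0 (some "D")))
        (fun s x _ h => by exact pvShape_set2 _ _ _ h) st hs2
    constructor
    · intro p q hp hq h
      show pvGet2 (pvSet2 _ (1 + (c : Int)) 0 (some "D")) p q none = pvGet2 st.2 p q none
      rw [pvGet2_set2_ne _ _ _ _ _ _ _ (by push_cast at h; omega)]
      exact ih1 p q hp hq (by rintro ⟨ha, hb, hcc⟩; exact h ⟨ha, by push_cast; omega, hcc⟩)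
    · intro p h1 h2
      by_cases hp : p = 1 + (c : Int)
      · subst hp
        show pvGet2 (pvSet2 _ (1 + (c : Int)) 0 (some "D")) (1 + (c : Int)) 0 none = some "D"
        refine pvGet2_set2_same _ _ _ _ _ ?_ ?_
        · obtain ⟨hlen, _⟩ := hshF; push_cast at h2; omega
        · rw [pvShape_rowlen hshF _ (by push_cast at h2; omega)]; omega
      · have hp2 : p ≤ (c : Int) := by push_cast at h2; omega
        show pvGet2 (pvSet2 _ (1 + (c : Int)) 0 (some "D")) p 0 none = some "D"
        rw [pvGet2_set2_ne _ _ _ _ _ _ _ (by omega)]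
        exact ih2 p h1 hp2

theorem aTrace_shift (act : List (List (Option String))) :
    ∀ (fuel : Nat) (i j : Int) (acc : List (Option String)),
    aTrace act fuel i j acc = acc ++ aTrace act fuel i j [] := by
  intro fuel
  induction fuel with
  | zero => intro i j acc; simp [aTrace]
  | succ f ih =>
    intro i j acc
    by_cases hg : 0 < i ∨ 0 < j
    · simp only [aTrace, if_pos hg]
      split_ifs <;> (rw [ih]; rw [ih _ _ ([] ++ [pvGet2 act i j none])]; simp)
    · simp [aTrace, hg]


-- single-character strings and the 1-indexed padded lists both ports' Pythons index into
def sgl (c : Char) : String := String.ofList [c]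

theorem sgl_inj (a b : Char) : sgl a = sgl b ↔ a = b := by
  constructor
  · intro h
    have := congrArg String.toList h
    simpa [sgl] using this
  · intro h; rw [h]

theorem getPad (s : List Char) (j : Nat) (hj : j < s.length) :
    PySem.List.pyGetD (("" : String) :: s.map sgl) (1 + (j : Int)) "" = sgl (s.getD j ' ') := by
  rw [show (1 + (j : Int)) = ((j + 1 : Nat) : Int) by push_cast; ring, PySem.List.pyGetD_natCast]
  simp only [List.getD_cons_succ]
  simp [List.getD_eq_getElem?_getD, hj]

theorem headD_drop (s : List Char) (j : Nat) (hj : j < s.length) :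
    (s.drop j).headD ' ' = s.getD j ' ' := by
  rw [List.headD_eq_head?_getD, List.head?_drop, List.getD_eq_getElem?_getD]

-- the reference DP: cell (i, j) carries (cost, plan), plan a cons-chain of moves (latest first)
def sp (s1 s2 : List Char) (cp rp ins dl : Int) : Nat → Nat → Int × List String
  | 0, 0 => ((0 : Int), ([] : List String))
  | 0, j+1 => ((sp s1 s2 cp rp ins dl 0 j).1 + ins, "I" :: (sp s1 s2 cp rp ins dl 0 j).2)
  | i+1, 0 => ((sp s1 s2 cp rp ins dl i 0).1 + dl, "D" :: (sp s1 s2 cp rp ins dl i 0).2)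
  | i+1, j+1 =>
      bBest (s1.getD i ' ' == s2.getD j ' ') cp rp ins dl
        (sp s1 s2 cp rp ins dl i j) (sp s1 s2 cp rp ins dl (i+1) j) (sp s1 s2 cp rp ins dl i (j+1))
  termination_by i j => (i, j)

-- every bBest result is one of four labelled extensions of a neighbour
theorem bBest_cases (eqc : Bool) (cp rp ins dl : Int) (d l u : Int × List String) :
    bBest eqc cp rp ins dl d l u = (d.1 + rp, "R" :: d.2) ∨
    bBest eqc cp rp ins dl d l u = (l.1 + ins, "I" :: l.2) ∨
    bBest eqc cp rp ins dl d l u = (u.1 + dl, "D" :: u.2) ∨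
    bBest eqc cp rp ins dl d l u = (d.1 + cp, "C" :: d.2) := by
  simp only [bBest]
  split_ifs <;> simp


-- sp with both coordinates positive is a bBest step (equation lemma, spelled out)
theorem sp_eq_succ (s1 s2 : List Char) (cp rp ins dl : Int) (i j : Nat) :
    sp s1 s2 cp rp ins dl (i+1) (j+1)
      = bBest (s1.getD i ' ' == s2.getD j ' ') cp rp ins dl
          (sp s1 s2 cp rp ins dl i j) (sp s1 s2 cp rp ins dl (i+1) j) (sp s1 s2 cp rp ins dl i (j+1)) := by
  rw [sp]

-- one backward step of the reference plan: the head move determines the predecessor cell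
theorem sp_step (s1 s2 : List Char) (cp rp ins dl : Int) (i j : Nat) (h : 0 < i + j) :
    (0 < j ∧ (sp s1 s2 cp rp ins dl i j).2.headD "" = "I" ∧
      sp s1 s2 cp rp ins dl i j = ((sp s1 s2 cp rp ins dl i (j-1)).1 + ins, "I" :: (sp s1 s2 cp rp ins dl i (j-1)).2)) ∨
    (0 < i ∧ (sp s1 s2 cp rp ins dl i j).2.headD "" = "D" ∧
      sp s1 s2 cp rp ins dl i j = ((sp s1 s2 cp rp ins dl (i-1) j).1 + dl, "D" :: (sp s1 s2 cp rp ins dl (i-1) j).2)) ∨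
    (0 < i ∧ 0 < j ∧ (sp s1 s2 cp rp ins dl i j).2.headD "" = "R" ∧
      sp s1 s2 cp rp ins dl i j = ((sp s1 s2 cp rp ins dl (i-1) (j-1)).1 + rp, "R" :: (sp s1 s2 cp rp ins dl (i-1) (j-1)).2)) ∨
    (0 < i ∧ 0 < j ∧ (sp s1 s2 cp rp ins dl i j).2.headD "" = "C" ∧
      sp s1 s2 cp rp ins dl i j = ((sp s1 s2 cp rp ins dl (i-1) (j-1)).1 + cp, "C" :: (sp s1 s2 cp rp ins dl (i-1) (j-1)).2)) := by
  match i, j with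
  | 0, 0 => omega
  | 0, j+1 =>
    left
    refine ⟨by omega, ?_, ?_⟩ <;> simp [sp]
  | i+1, 0 =>
    right; left
    refine ⟨by omega, ?_, ?_⟩ <;> simp [sp]
  | i+1, j+1 =>
    rw [sp_eq_succ]
    rcases bBest_cases (s1.getD i ' ' == s2.getD j ' ') cp rp ins dl
      (sp s1 s2 cp rp ins dl i j) (sp s1 s2 cp rp ins dl (i+1) j) (sp s1 s2 cp rp ins dl i (j+1)) with hc | hc | hc | hc <;>
      rw [hc] <;> simp
-- the reference plan consumes exactly i characters of s1 and j of s2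
theorem sp_cnt (s1 s2 : List Char) (cp rp ins dl : Int) :
    ∀ (k i j : Nat), i + j = k →
    ((sp s1 s2 cp rp ins dl i j).2.filter (fun a => a ≠ "I")).length = i ∧
    ((sp s1 s2 cp rp ins dl i j).2.filter (fun a => a ≠ "D")).length = j := by
  intro k
  induction k using Nat.strong_induction_on with
  | _ k ih =>
    intro i j hij
    match k, hij with
    | 0, hij =>
      have hi : i = 0 := by omega
      have hj : j = 0 := by omega
      subst hi; subst hj
      simp [sp]
    | k+1, hij =>
      rcases sp_step s1 s2 cp rp ins dl i j (by omega) with ⟨hj, _, he⟩ | ⟨hi, _, he⟩ | ⟨hi, hj, _, he⟩ | ⟨hi, hj, _, he⟩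
      · obtain ⟨c1, c2⟩ := ih k (by omega) i (j-1) (by omega)
        rw [he]; simp [List.filter_cons]
        simp at c1 c2
        omega
      · obtain ⟨c1, c2⟩ := ih k (by omega) (i-1) j (by omega)
        rw [he]; simp [List.filter_cons]
        simp at c1 c2
        omega
      · obtain ⟨c1, c2⟩ := ih (k-1) (by omega) (i-1) (j-1) (by omega)
        rw [he]; simp [List.filter_cons]
        simp at c1 c2
        omega
      · obtain ⟨c1, c2⟩ := ih (k-1) (by omega) (i-1) (j-1) (by omega)
        rw [he]; simp [List.filter_cons]
        simp at c1 c2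
        omega
-- A's traceback over a correct action table reads off exactly the reference plan chain
theorem trace_sp (act : List (List (Option String))) (s1 s2 : List Char) (cp rp ins dl : Int)
    (H : ∀ p q : Nat, p ≤ s1.length → q ≤ s2.length → 0 < p + q →
      pvGet2 act (p : Int) (q : Int) none = some ((sp s1 s2 cp rp ins dl p q).2.headD "")) :
    ∀ (fuel : Nat) (i j : Nat), i ≤ s1.length → j ≤ s2.length → i + j ≤ fuel →
    aTrace act fuel (i : Int) (j : Int) [] = (sp s1 s2 cp rp ins dl i j).2.map some := by
  intro fuel
  induction fuel with
  | zero =>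
    intro i j _ _ hf
    have hi : i = 0 := by omega
    have hj : j = 0 := by omega
    subst hi; subst hj
    simp [aTrace, sp]
  | succ f ih =>
    intro i j him hjn hf
    by_cases hg : 0 < i + j
    · have hgi : (0 : Int) < (i : Int) ∨ (0 : Int) < (j : Int) := by omega
      have ha := H i j him hjn hg
      rcases sp_step s1 s2 cp rp ins dl i j hg with ⟨hj, hm, he⟩ | ⟨hi, hm, he⟩ | ⟨hi, hj, hm, he⟩ | ⟨hi, hj, hm, he⟩
      · simp only [aTrace, if_pos hgi, ha, hm, List.nil_append]
        simp only [reduceIte, Option.some.injEq, String.reduceEq, or_self, or_false, false_or, if_false, if_true, ite_false, ite_true]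
        rw [aTrace_shift,
          show (j : Int) - 1 = ((j - 1 : Nat) : Int) by omega,
          ih i (j-1) him (by omega) (by omega), he]
        simp
      · simp only [aTrace, if_pos hgi, ha, hm, List.nil_append]
        simp only [reduceIte, Option.some.injEq, String.reduceEq, or_self, or_false, false_or, if_false, if_true, ite_false, ite_true]
        rw [aTrace_shift,
          show (i : Int) - 1 = ((i - 1 : Nat) : Int) by omega,
          ih (i-1) j (by omega) hjn (by omega), he]
        simp
      · simp only [aTrace, if_pos hgi, ha, hm, List.nil_append]
        simp only [reduceIte, Option.some.injEq, String.reduceEq, or_self, or_false, false_or, if_false, if_true, ite_false, ite_true]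
        rw [aTrace_shift,
          show (i : Int) - 1 = ((i - 1 : Nat) : Int) by omega,
          show (j : Int) - 1 = ((j - 1 : Nat) : Int) by omega,
          ih (i-1) (j-1) (by omega) (by omega) (by omega), he]
        simp
      · simp only [aTrace, if_pos hgi, ha, hm, List.nil_append]
        simp only [reduceIte, Option.some.injEq, String.reduceEq, or_self, or_false, false_or, if_false, if_true, ite_false, ite_true]
        rw [aTrace_shift,
          show (i : Int) - 1 = ((i - 1 : Nat) : Int) by omega,
          show (j : Int) - 1 = ((j - 1 : Nat) : Int) by omega,
          ih (i-1) (j-1) (by omega) (by omega) (by omega), he]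
        simp
    · have hi : i = 0 := by omega
      have hj : j = 0 := by omega
      subst hi; subst hj
      simp [aTrace, sp]
theorem bUnwind_id : ∀ (l acc : List String), bUnwind l acc = acc ++ l := by
  intro l
  induction l with
  | nil => intro acc; simp [bUnwind]
  | cons a t ih => intro acc; rw [bUnwind, ih]; simp

theorem getLastD_map_range {α : Type} (f : Nat → α) (k : Nat) (d : α) :
    ((List.range (k+1)).map f).getLastD d = f k := by
  rw [List.range_succ, List.map_append]
  simp

-- B's row 0 builds the j-insertions prefix of the reference DP
theorem bRow0_eq_aux (s1 s2 : List Char) (cp rp ins dl : Int) :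
    ∀ (cs : List Char) (k : Nat),
    cs.foldl (fun acc _ => acc ++ [((acc.getLastD (0, [])).1 + ins, "I" :: (acc.getLastD (0, [])).2)])
      ((List.range (k+1)).map (fun j => sp s1 s2 cp rp ins dl 0 j))
    = (List.range (k + cs.length + 1)).map (fun j => sp s1 s2 cp rp ins dl 0 j) := by
  intro cs
  induction cs with
  | nil => intro k; simp
  | cons c t ih =>
    intro k
    rw [List.foldl_cons, getLastD_map_range]
    have : (List.range (k+1)).map (fun j => sp s1 s2 cp rp ins dl 0 j) ++
        [((sp s1 s2 cp rp ins dl 0 k).1 + ins, "I" :: (sp s1 s2 cp rp ins dl 0 k).2)]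
        = (List.range (k+1+1)).map (fun j => sp s1 s2 cp rp ins dl 0 j) := by
      rw [List.range_succ (n := k+1), List.map_append]
      simp [sp]
    rw [this, ih (k+1)]
    simp only [List.length_cons]
    rw [show k + 1 + t.length + 1 = k + (t.length + 1) + 1 from by omega]

theorem bRow0_eq (s1 s2 : List Char) (cp rp ins dl : Int) :
    bRow0 ins s2 = (List.range (s2.length + 1)).map (fun j => sp s1 s2 cp rp ins dl 0 j) := by
  have h0 : [((0 : Int), ([] : List String))]
      = (List.range 1).map (fun j => sp s1 s2 cp rp ins dl 0 j) := by simp [sp]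
  rw [bRow0, h0, bRow0_eq_aux s1 s2 cp rp ins dl s2 0]
  norm_num

-- B's inner loop turns row i of the reference DP into row i+1
theorem bRowAux_eq (s1 s2 : List Char) (cp rp ins dl : Int) (i : Nat) :
    ∀ (k j : Nat), j + k = s2.length →
    bRowAux (s1.getD i ' ') cp rp ins dl (sp s1 s2 cp rp ins dl i j) (sp s1 s2 cp rp ins dl (i+1) j)
        (s2.drop j) ((List.range' (j+1) k).map (fun q => sp s1 s2 cp rp ins dl i q))
      = (List.range' (j+1) k).map (fun q => sp s1 s2 cp rp ins dl (i+1) q) := by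
  intro k
  induction k with
  | zero =>
    intro j hj
    rw [show j = s2.length by omega, List.drop_length]
    simp [bRowAux]
  | succ k ih =>
    intro j hj
    have hjl : j < s2.length := by omega
    rw [List.range'_succ, List.map_cons,
      show s2.drop j = s2.getD j ' ' :: s2.drop (j+1) by
        rw [List.getD_eq_getElem?_getD, List.getElem?_eq_getElem hjl]
        exact (List.getElem_cons_drop hjl).symm,
      bRowAux]
    rw [show bBest (s1.getD i ' ' == s2.getD j ' ') cp rp ins dl (sp s1 s2 cp rp ins dl i j)
          (sp s1 s2 cp rp ins dl (i+1) j) (sp s1 s2 cp rp ins dl i (j+1))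
        = sp s1 s2 cp rp ins dl (i+1) (j+1) from (sp_eq_succ s1 s2 cp rp ins dl i j).symm]
    rw [show j + 1 + 1 = (j+1) + 1 by ring] at *
    rw [ih (j+1) (by omega)]
    simp

theorem bRow_eq (s1 s2 : List Char) (cp rp ins dl : Int) (i : Nat) :
    bRow (s1.getD i ' ') cp rp ins dl s2
        ((List.range (s2.length + 1)).map (fun q => sp s1 s2 cp rp ins dl i q))
      = (List.range (s2.length + 1)).map (fun q => sp s1 s2 cp rp ins dl (i+1) q) := by
  rw [show List.range (s2.length + 1) = 0 :: List.range' 1 s2.length by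
      rw [List.range_eq_range', List.range'_succ]]
  simp only [List.map_cons, bRow]
  rw [show ("D" :: (sp s1 s2 cp rp ins dl i 0).2) = (sp s1 s2 cp rp ins dl (i+1) 0).2 by simp [sp],
    show (sp s1 s2 cp rp ins dl i 0).1 + dl = (sp s1 s2 cp rp ins dl (i+1) 0).1 by simp [sp]]
  have h := bRowAux_eq s1 s2 cp rp ins dl i s2.length 0 (by omega)
  rw [List.drop_zero] at h
  rw [h]

-- B's outer fold produces the last reference row
theorem bRows_eq (s1 s2 : List Char) (cp rp ins dl : Int) :
    ∀ (k i : Nat), i + k = s1.length →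
    (s1.drop i).foldl (fun prev c1 => bRow c1 cp rp ins dl s2 prev)
        ((List.range (s2.length + 1)).map (fun q => sp s1 s2 cp rp ins dl i q))
      = (List.range (s2.length + 1)).map (fun q => sp s1 s2 cp rp ins dl s1.length q) := by
  intro k
  induction k with
  | zero =>
    intro i hi
    rw [show i = s1.length by omega, List.drop_length]
    rfl
  | succ k ih =>
    intro i hi
    have hil : i < s1.length := by omega
    rw [show s1.drop i = s1.getD i ' ' :: s1.drop (i+1) by
        rw [List.getD_eq_getElem?_getD, List.getElem?_eq_getElem hil]
        exact (List.getElem_cons_drop hil).symm,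
      List.foldl_cons, bRow_eq s1 s2 cp rp ins dl i]
    exact ih (i+1) (by omega)
-- one-step forms of both renderers
theorem aStep_I (l1 l2 : List String) (st : Int × Int × List String × List String × List String) :
    aRenderStep l1 l2 st (some "I")
      = (st.1, st.2.1 + 1, st.2.2.1 ++ [" "], st.2.2.2.1 ++ [PySem.List.pyGetD l2 st.2.1 ""], st.2.2.2.2 ++ ["*"]) := by
  simp [aRenderStep]

theorem aStep_D (l1 l2 : List String) (st : Int × Int × List String × List String × List String) :
    aRenderStep l1 l2 st (some "D")
      = (st.1 + 1, st.2.1, st.2.2.1 ++ [PySem.List.pyGetD l1 st.1 ""], st.2.2.2.1 ++ [" "], st.2.2.2.2 ++ ["*"]) := by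
  simp [aRenderStep]

theorem aStep_other (l1 l2 : List String) (st : Int × Int × List String × List String × List String)
    (a : String) (hI : ¬ a = "I") (hD : ¬ a = "D") :
    aRenderStep l1 l2 st (some a)
      = (st.1 + 1, st.2.1 + 1, st.2.2.1 ++ [PySem.List.pyGetD l1 st.1 ""],
         st.2.2.2.1 ++ [PySem.List.pyGetD l2 st.2.1 ""], st.2.2.2.2 ++ [if a = "R" then "-" else "+"]) := by
  by_cases hR : a = "R" <;> simp [aRenderStep, hI, hD, hR]

theorem bRender_I (ms : List String) (s1 s2 : List Char) :
    bRender ("I" :: ms) s1 s2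
      = (' ' :: (bRender ms s1 s2.tail).1, s2.headD ' ' :: (bRender ms s1 s2.tail).2.1,
         '*' :: (bRender ms s1 s2.tail).2.2) := by
  simp [bRender]

theorem bRender_D (ms : List String) (s1 s2 : List Char) :
    bRender ("D" :: ms) s1 s2
      = (s1.headD ' ' :: (bRender ms s1.tail s2).1, ' ' :: (bRender ms s1.tail s2).2.1,
         '*' :: (bRender ms s1.tail s2).2.2) := by
  simp [bRender]

theorem bRender_other (ms : List String) (s1 s2 : List Char) (a : String)
    (hI : ¬ a = "I") (hD : ¬ a = "D") :
    bRender (a :: ms) s1 s2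
      = (s1.headD ' ' :: (bRender ms s1.tail s2.tail).1, s2.headD ' ' :: (bRender ms s1.tail s2.tail).2.1,
         (if a = "R" then '-' else '+') :: (bRender ms s1.tail s2.tail).2.2) := by
  simp [bRender, hI, hD]

-- A's three append lists walk the padded 1-indexed lists exactly as B's renderer walks the strings
theorem renderAB (s1 s2 : List Char) :
    ∀ (ms : List String) (i j : Nat) (k1 k2 k3 : List String),
    i + (ms.filter (fun a => a ≠ "I")).length ≤ s1.length →
    j + (ms.filter (fun a => a ≠ "D")).length ≤ s2.length →
    (ms.map some).foldl (aRenderStep (("" : String) :: s1.map sgl) (("" : String) :: s2.map sgl))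
        (1 + (i : Int), 1 + (j : Int), k1, k2, k3)
      = (1 + ((i + (ms.filter (fun a => a ≠ "I")).length : Nat) : Int),
         1 + ((j + (ms.filter (fun a => a ≠ "D")).length : Nat) : Int),
         k1 ++ (bRender ms (s1.drop i) (s2.drop j)).1.map sgl,
         k2 ++ (bRender ms (s1.drop i) (s2.drop j)).2.1.map sgl,
         k3 ++ (bRender ms (s1.drop i) (s2.drop j)).2.2.map sgl) := by
  intro ms
  induction ms with
  | nil =>
    intro i j k1 k2 k3 _ _
    simp [bRender]
  | cons a t ih =>
    intro i j k1 k2 k3 h1 h2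
    by_cases hI : a = "I"
    · subst hI
      have hjl : j < s2.length := by simp [List.filter_cons] at h2; omega
      rw [List.map_cons, List.foldl_cons, aStep_I]
      simp only
      rw [show (1 + (j : Int)) = 1 + ((j : Nat) : Int) from rfl, getPad s2 j hjl]
      have hrec := ih i (j+1) (k1 ++ [" "]) (k2 ++ [sgl (s2.getD j ' ')]) (k3 ++ ["*"])
        (by simp [List.filter_cons] at h1 ⊢; omega) (by simp [List.filter_cons] at h2 ⊢; omega)
      rw [show (1 + ((j+1 : Nat) : Int)) = 1 + (j : Int) + 1 by push_cast; ring] at hrec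
      rw [hrec, bRender_I, List.tail_drop]
      rw [headD_drop s2 j hjl]
      simp only [List.filter_cons, List.map_cons]
      refine congrArg₂ _ (by norm_num) (congrArg₂ _ (by push_cast; simp; ring) ?_)
      refine congrArg₂ _ (by simp [List.append_assoc, sgl]) (congrArg₂ _ (by simp [List.append_assoc]) (by simp [List.append_assoc, sgl]))
    · by_cases hD : a = "D"
      · subst hD
        have hil : i < s1.length := by simp [List.filter_cons] at h1; omega
        rw [List.map_cons, List.foldl_cons, aStep_D]
        simp only
        rw [show (1 + (i : Int)) = 1 + ((i : Nat) : Int) from rfl, getPad s1 i hil]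
        have hrec := ih (i+1) j (k1 ++ [sgl (s1.getD i ' ')]) (k2 ++ [" "]) (k3 ++ ["*"])
          (by simp [List.filter_cons] at h1 ⊢; omega) (by simp [List.filter_cons] at h2 ⊢; omega)
        rw [show (1 + ((i+1 : Nat) : Int)) = 1 + (i : Int) + 1 by push_cast; ring] at hrec
        rw [hrec, bRender_D, List.tail_drop]
        rw [headD_drop s1 i hil]
        simp only [List.filter_cons, List.map_cons]
        refine congrArg₂ _ (by push_cast; simp; ring) (congrArg₂ _ (by norm_num) ?_)
        refine congrArg₂ _ (by simp [List.append_assoc]) (congrArg₂ _ (by simp [List.append_assoc, sgl]) (by simp [List.append_assoc, sgl]))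
      · have hil : i < s1.length := by simp [List.filter_cons, hI] at h1; omega
        have hjl : j < s2.length := by simp [List.filter_cons, hD] at h2; omega
        rw [List.map_cons, List.foldl_cons, aStep_other _ _ _ a hI hD]
        simp only
        rw [show (1 + (i : Int)) = 1 + ((i : Nat) : Int) from rfl, getPad s1 i hil,
          show (1 + (j : Int)) = 1 + ((j : Nat) : Int) from rfl, getPad s2 j hjl]
        have hrec := ih (i+1) (j+1) (k1 ++ [sgl (s1.getD i ' ')]) (k2 ++ [sgl (s2.getD j ' ')])
          (k3 ++ [if a = "R" then "-" else "+"])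
          (by simp [List.filter_cons, hI] at h1 ⊢; omega) (by simp [List.filter_cons, hD] at h2 ⊢; omega)
        rw [show (1 + ((i+1 : Nat) : Int)) = 1 + (i : Int) + 1 by push_cast; ring,
          show (1 + ((j+1 : Nat) : Int)) = 1 + (j : Int) + 1 by push_cast; ring] at hrec
        rw [hrec, bRender_other _ _ _ a hI hD, List.tail_drop, List.tail_drop]
        rw [headD_drop s1 i hil, headD_drop s2 j hjl]
        simp only [List.filter_cons, List.map_cons]
        refine congrArg₂ _ (by push_cast; simp [hI]; ring) (congrArg₂ _ (by push_cast; simp [hD]; ring) ?_)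
        refine congrArg₂ _ (by simp [List.append_assoc]) (congrArg₂ _ (by simp [List.append_assoc]) ?_)
        by_cases hR : a = "R" <;> simp [hR, List.append_assoc, sgl]
theorem pvGet2_rep (M N : Nat) (p q : Int) :
    pvGet2 (List.replicate (M+1) (List.replicate (N+1) (0 : Int))) p q 0 = 0 := by
  unfold pvGet2
  simp [List.getD_eq_getElem?_getD, List.getElem?_replicate]
  split_ifs <;> simp [List.getD_eq_getElem?_getD, List.getElem?_replicate]
  split_ifs <;> rfl

theorem padEq (s1 s2 : List Char) (p q : Nat) (hp : p < s1.length) (hq : q < s2.length) :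
    (PySem.List.pyGetD (("" : String) :: s1.map sgl) (1 + (p : Int)) ""
      = PySem.List.pyGetD (("" : String) :: s2.map sgl) (1 + (q : Int)) "")
    ↔ ((s1.getD p ' ' == s2.getD q ' ') = true) := by
  rw [getPad s1 p hp, getPad s2 q hq, sgl_inj]
  simp

-- the ghost cell's written cost is the bBest cost of its three read neighbours
theorem gCell_val (l1 l2 : List String) (cp rp ins dl : Int) (i j : Int) (dp : List (List Int))
    (M N : Nat) (hs : pvShape M N dp) (hi1 : 1 ≤ i) (hi2 : i ≤ (M : Int)) (hj1 : 1 ≤ j) (hj2 : j ≤ (N : Int)) :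
    pvGet2 (gCell l1 l2 cp rp ins dl i j dp) i j 0
      = (bBest (decide (PySem.List.pyGetD l1 i "" = PySem.List.pyGetD l2 j "")) cp rp ins dl
          (pvGet2 dp (i-1) (j-1) 0, []) (pvGet2 dp i (j-1) 0, []) (pvGet2 dp (i-1) j 0, [])).1 := by
  have hIL : i.toNat < dp.length := by obtain ⟨hlen, _⟩ := hs; omega
  have hJL : j.toNat < (dp.getD i.toNat []).length := by rw [pvShape_rowlen hs _ (by omega)]; omega
  simp only [gCell]
  rw [pvGet2_set2_same _ _ _ _ _ hIL hJL]
  simp only [bBest, decide_eq_true_eq]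
  split_ifs <;> simp_all

-- the bBest cost component only depends on the costs
theorem bBest_fst (eqc : Bool) (cp rp ins dl : Int) (d l u : Int × List String) :
    (bBest eqc cp rp ins dl d l u).1 = (bBest eqc cp rp ins dl (d.1, []) (l.1, []) (u.1, [])).1 := by
  simp only [bBest]
  split_ifs <;> rfl

-- likewise the head move only depends on the costs and labels
theorem bBest_head (eqc : Bool) (cp rp ins dl : Int) (d l u : Int × List String) :
    (bBest eqc cp rp ins dl d l u).2.headD ""
      = (bBest eqc cp rp ins dl (d.1, []) (l.1, []) (u.1, [])).2.headD "" := by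
  simp only [bBest]
  split_ifs <;> rfl

-- ghost fill of one row: columns 1..c of row i get the reference costs
theorem gRow (s1 s2 : List Char) (cp rp ins dl : Int) (i : Nat) (hi : 1 ≤ i) (hiM : i ≤ s1.length)
    (c : Nat) (hc : c ≤ s2.length) :
    ∀ (dp : List (List Int)), pvShape s1.length s2.length dp →
    (∀ q : Nat, q ≤ s2.length → pvGet2 dp ((i : Int) - 1) (q : Int) 0 = (sp s1 s2 cp rp ins dl (i-1) q).1) →
    (pvGet2 dp (i : Int) 0 0 = (sp s1 s2 cp rp ins dl i 0).1) →
    ∀ q : Nat, 1 ≤ q → q ≤ c →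
    pvGet2 ((PySem.List.pyRange 1 (1 + (c : Int)) 1).foldl
        (fun dp j => gCell (("" : String) :: s1.map sgl) (("" : String) :: s2.map sgl) cp rp ins dl (i : Int) j dp) dp)
      (i : Int) (q : Int) 0 = (sp s1 s2 cp rp ins dl i q).1 := by
  induction c with
  | zero => intro dp _ _ _ q h1 h2; omega
  | succ c ih =>
    intro dp hsh hprev h0 q h1 h2
    rw [pvRange_succ, List.foldl_append]
    simp only [List.foldl_cons, List.foldl_nil]
    have hshF : pvShape s1.length s2.length ((PySem.List.pyRange 1 (1 + (c : Int)) 1).foldl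
        (fun dp j => gCell (("" : String) :: s1.map sgl) (("" : String) :: s2.map sgl) cp rp ins dl (i : Int) j dp) dp) := by
      refine pvFoldInv (pvShape s1.length s2.length) _ _ (fun s x _ h => ?_) dp hsh
      simp only [gCell]
      exact pvShape_set2 _ _ _ h
    have hpres := gInnerPres (("" : String) :: s1.map sgl) (("" : String) :: s2.map sgl) cp rp ins dl (i : Int) (by omega) c dp
    by_cases hq : q = c + 1
    · subst hq
      rw [show ((c + 1 : Nat) : Int) = 1 + (c : Int) by push_cast; ring]
      rw [gCell_val _ _ _ _ _ _ _ _ _ _ _ hshF (by omega) (by omega) (by omega) (by push_cast; omega)]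
      have hd : pvGet2 ((PySem.List.pyRange 1 (1 + (c : Int)) 1).foldl
          (fun dp j => gCell (("" : String) :: s1.map sgl) (("" : String) :: s2.map sgl) cp rp ins dl (i : Int) j dp) dp)
          ((i : Int) - 1) (1 + (c : Int) - 1) 0 = (sp s1 s2 cp rp ins dl (i-1) c).1 := by
        rw [hpres _ _ (by omega) (by omega) (by omega),
          show ((1 : Int) + (c : Int) - 1) = ((c : Nat) : Int) by push_cast; ring]
        exact hprev c (by omega)
      have hu : pvGet2 ((PySem.List.pyRange 1 (1 + (c : Int)) 1).foldl
          (fun dp j => gCell (("" : String) :: s1.map sgl) (("" : String) :: s2.map sgl) cp rp ins dl (i : Int) j dp) dp)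
          ((i : Int) - 1) (1 + (c : Int)) 0 = (sp s1 s2 cp rp ins dl (i-1) (c+1)).1 := by
        rw [hpres _ _ (by omega) (by omega) (by omega),
          show ((1 : Int) + (c : Int)) = ((c + 1 : Nat) : Int) by push_cast; ring]
        exact hprev (c+1) (by omega)
      have hl : pvGet2 ((PySem.List.pyRange 1 (1 + (c : Int)) 1).foldl
          (fun dp j => gCell (("" : String) :: s1.map sgl) (("" : String) :: s2.map sgl) cp rp ins dl (i : Int) j dp) dp)
          (i : Int) (1 + (c : Int) - 1) 0 = (sp s1 s2 cp rp ins dl i c).1 := by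
        rcases Nat.eq_zero_or_pos c with hc0 | hc0
        · subst hc0
          rw [show ((1 : Int) + ((0 : Nat) : Int) - 1 : Int) = ((0 : Nat) : Int) by norm_num]
          rw [hpres _ _ (by omega) (by omega) (by omega)]
          simpa using h0
        · rw [show ((1 : Int) + (c : Int) - 1) = ((c : Nat) : Int) by push_cast; ring]
          exact ih (by omega) dp hsh hprev h0 c hc0 le_rfl
      rw [hd, hu, hl]
      obtain ⟨i', rfl⟩ : ∃ i', i = i' + 1 := ⟨i - 1, by omega⟩
      rw [show (i' + 1 : Nat) - 1 = i' from rfl]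
      rw [sp_eq_succ, bBest_fst]
      have he : decide (PySem.List.pyGetD (("" : String) :: s1.map sgl) (((i' + 1 : Nat)) : Int) ""
          = PySem.List.pyGetD (("" : String) :: s2.map sgl) (1 + (c : Int)) "")
          = (s1.getD i' ' ' == s2.getD c ' ') := by
        rw [show (((i' + 1 : Nat)) : Int) = 1 + (i' : Int) by push_cast; ring]
        rcases Bool.eq_false_or_eq_true (s1.getD i' ' ' == s2.getD c ' ') with hb | hb
        · rw [hb, decide_eq_true_eq]
          rw [padEq s1 s2 i' c (by omega) (by omega), hb]
        · rw [hb, decide_eq_false_iff_not]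
          rw [padEq s1 s2 i' c (by omega) (by omega), hb]
          simp
      rw [he]
      simp only [Prod.fst]
      exact (bBest_fst (s1.getD i' ' ' == s2.getD c ' ') cp rp ins dl (sp s1 s2 cp rp ins dl i' c)
        (sp s1 s2 cp rp ins dl (i'+1) c) (sp s1 s2 cp rp ins dl i' (c+1))).symm
    · rw [gCell_ne _ _ _ _ _ _ _ _ _ _ _ (by omega)]
      exact ih (by omega) dp hsh hprev h0 q h1 (by omega)
-- ghost column init: row 0 gets the reference costs, nothing else moves (all zeros)
theorem gColCost (s1 s2 : List Char) (cp rp ins dl : Int) (M N : Nat) (c : Nat) (hc : c ≤ N) :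
    (∀ p q : Int, ¬(p.toNat = 0 ∧ 1 ≤ q ∧ q ≤ (c : Int)) →
      pvGet2 ((PySem.List.pyRange 1 (1 + (c : Int)) 1).foldl
          (fun dp j => pvSet2 dp 0 j (pvGet2 dp 0 (j-1) 0 + ins))
          (List.replicate (M+1) (List.replicate (N+1) 0))) p q 0 = 0) ∧
    (∀ q : Nat, 1 ≤ q → q ≤ c →
      pvGet2 ((PySem.List.pyRange 1 (1 + (c : Int)) 1).foldl
          (fun dp j => pvSet2 dp 0 j (pvGet2 dp 0 (j-1) 0 + ins))
          (List.replicate (M+1) (List.replicate (N+1) 0))) 0 (q : Int) 0 = (sp s1 s2 cp rp ins dl 0 q).1) := by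
  induction c with
  | zero =>
    refine ⟨?_, ?_⟩
    · intro p q _
      rw [pvRangeNil 0 rfl]
      exact pvGet2_rep M N p q
    · intro q h1 h2; omega
  | succ c ih =>
    obtain ⟨ih1, ih2⟩ := ih (by omega)
    have hshF : pvShape M N ((PySem.List.pyRange 1 (1 + (c : Int)) 1).foldl
        (fun dp j => pvSet2 dp 0 j (pvGet2 dp 0 (j-1) 0 + ins))
        (List.replicate (M+1) (List.replicate (N+1) 0))) :=
      pvFoldInv (pvShape M N) _ _ (fun s x _ h => pvShape_set2 _ _ _ h) _ (pvShape_replicate M N 0)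
    rw [pvRange_succ]
    refine ⟨?_, ?_⟩
    · intro p q h
      rw [List.foldl_append]
      simp only [List.foldl_cons, List.foldl_nil]
      rw [pvGet2_set2_ne _ _ _ _ _ _ _ (by push_cast at h; omega)]
      exact ih1 p q (by rintro ⟨ha, hb, hcc⟩; exact h ⟨ha, hb, by push_cast; omega⟩)
    · intro q h1 h2
      rw [List.foldl_append]
      simp only [List.foldl_cons, List.foldl_nil]
      by_cases hq : q = c + 1
      · subst hq
        have hv : pvGet2 ((PySem.List.pyRange 1 (1 + (c : Int)) 1).foldl
            (fun dp j => pvSet2 dp 0 j (pvGet2 dp 0 (j-1) 0 + ins))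
            (List.replicate (M+1) (List.replicate (N+1) 0))) 0 (1 + (c : Int) - 1) 0
            = (sp s1 s2 cp rp ins dl 0 c).1 := by
          rcases Nat.eq_zero_or_pos c with hc0 | hc0
          · subst hc0
            rw [ih1 _ _ (by omega)]
            simp [sp]
          · rw [show ((1 : Int) + (c : Int) - 1) = ((c : Nat) : Int) by push_cast; ring]
            exact ih2 c hc0 le_rfl
        rw [show ((c + 1 : Nat) : Int) = 1 + (c : Int) by push_cast; ring]
        rw [pvGet2_set2_same _ _ _ _ _ (by obtain ⟨hl, _⟩ := hshF; omega)
          (by rw [pvShape_rowlen hshF _ (by omega)]; push_cast; omega), hv]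
        simp [sp]
      · rw [pvGet2_set2_ne _ _ _ _ _ _ _ (by omega)]
        exact ih2 q h1 (by omega)

-- ghost row init: column 0 gets the reference costs, everything else keeps its start value
theorem gRowCost (s1 s2 : List Char) (cp rp ins dl : Int) (M N : Nat) (c : Nat) (hc : c ≤ M) :
    ∀ (dp : List (List Int)), pvShape M N dp → pvGet2 dp 0 0 0 = 0 →
    (∀ p q : Int, ¬(1 ≤ p ∧ p ≤ (c : Int) ∧ q.toNat = 0) →
      pvGet2 ((PySem.List.pyRange 1 (1 + (c : Int)) 1).foldl
          (fun dp i => pvSet2 dp i 0 (pvGet2 dp (i-1) 0 0 + dl)) dp) p q 0 = pvGet2 dp p q 0) ∧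
    (∀ p : Nat, 1 ≤ p → p ≤ c →
      pvGet2 ((PySem.List.pyRange 1 (1 + (c : Int)) 1).foldl
          (fun dp i => pvSet2 dp i 0 (pvGet2 dp (i-1) 0 0 + dl)) dp) (p : Int) 0 0 = (sp s1 s2 cp rp ins dl p 0).1) := by
  induction c with
  | zero =>
    intro dp _ _
    refine ⟨?_, ?_⟩
    · intro p q _
      rw [pvRangeNil 0 rfl]
      rfl
    · intro p h1 h2; omega
  | succ c ih =>
    intro dp hsh h00
    obtain ⟨ih1, ih2⟩ := ih (by omega) dp hsh h00
    have hshF : pvShape M N ((PySem.List.pyRange 1 (1 + (c : Int)) 1).foldl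
        (fun dp i => pvSet2 dp i 0 (pvGet2 dp (i-1) 0 0 + dl)) dp) :=
      pvFoldInv (pvShape M N) _ _ (fun s x _ h => pvShape_set2 _ _ _ h) _ hsh
    rw [pvRange_succ]
    refine ⟨?_, ?_⟩
    · intro p q h
      rw [List.foldl_append]
      simp only [List.foldl_cons, List.foldl_nil]
      rw [pvGet2_set2_ne _ _ _ _ _ _ _ (by push_cast at h; omega)]
      exact ih1 p q (by rintro ⟨ha, hb, hcc⟩; exact h ⟨ha, by push_cast; omega, hcc⟩)
    · intro p h1 h2
      rw [List.foldl_append]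
      simp only [List.foldl_cons, List.foldl_nil]
      by_cases hp : p = c + 1
      · subst hp
        have hv : pvGet2 ((PySem.List.pyRange 1 (1 + (c : Int)) 1).foldl
            (fun dp i => pvSet2 dp i 0 (pvGet2 dp (i-1) 0 0 + dl)) dp) (1 + (c : Int) - 1) 0 0
            = (sp s1 s2 cp rp ins dl c 0).1 := by
          rcases Nat.eq_zero_or_pos c with hc0 | hc0
          · subst hc0
            rw [ih1 _ _ (by omega)]
            simpa [sp] using h00
          · rw [show ((1 : Int) + (c : Int) - 1) = ((c : Nat) : Int) by push_cast; ring]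
            exact ih2 c hc0 le_rfl
        rw [show ((c + 1 : Nat) : Int) = 1 + (c : Int) by push_cast; ring]
        rw [pvGet2_set2_same _ _ _ _ _ (by obtain ⟨hl, _⟩ := hshF; push_cast; omega)
          (by rw [pvShape_rowlen hshF _ (by push_cast; omega)]; omega), hv]
        simp [sp]
      · rw [pvGet2_set2_ne _ _ _ _ _ _ _ (by omega)]
        exact ih2 p h1 (by omega)

-- the full ghost fill: every filled cell carries the reference cost, the rest keep their values
theorem gFill (s1 s2 : List Char) (cp rp ins dl : Int) (r : Nat) (hr : r ≤ s1.length) :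
    ∀ (dp : List (List Int)), pvShape s1.length s2.length dp →
    (∀ q : Nat, q ≤ s2.length → pvGet2 dp 0 (q : Int) 0 = (sp s1 s2 cp rp ins dl 0 q).1) →
    (∀ p : Nat, p ≤ s1.length → pvGet2 dp (p : Int) 0 0 = (sp s1 s2 cp rp ins dl p 0).1) →
    (∀ p q : Int, 0 ≤ p → 0 ≤ q → ¬(1 ≤ p ∧ p ≤ (r : Int) ∧ 1 ≤ q) →
      pvGet2 ((PySem.List.pyRange 1 (1 + (r : Int)) 1).foldl
          (fun dp i => (PySem.List.pyRange 1 (1 + ((s2.length : Nat) : Int)) 1).foldl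
            (fun dp j => gCell (("" : String) :: s1.map sgl) (("" : String) :: s2.map sgl) cp rp ins dl i j dp) dp) dp)
        p q 0 = pvGet2 dp p q 0) ∧
    (∀ p q : Nat, 1 ≤ p → p ≤ r → 1 ≤ q → q ≤ s2.length →
      pvGet2 ((PySem.List.pyRange 1 (1 + (r : Int)) 1).foldl
          (fun dp i => (PySem.List.pyRange 1 (1 + ((s2.length : Nat) : Int)) 1).foldl
            (fun dp j => gCell (("" : String) :: s1.map sgl) (("" : String) :: s2.map sgl) cp rp ins dl i j dp) dp) dp)
        (p : Int) (q : Int) 0 = (sp s1 s2 cp rp ins dl p q).1) := by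
  induction r with
  | zero =>
    intro dp _ _ _
    refine ⟨?_, ?_⟩
    · intro p q _ _ _
      rw [pvRangeNil 0 rfl]
      rfl
    · intro p q h1 h2 _ _; omega
  | succ r ih =>
    intro dp hsh hrow0 hcol0
    obtain ⟨ih1, ih2⟩ := ih (by omega) dp hsh hrow0 hcol0
    have hshF : pvShape s1.length s2.length ((PySem.List.pyRange 1 (1 + (r : Int)) 1).foldl
        (fun dp i => (PySem.List.pyRange 1 (1 + ((s2.length : Nat) : Int)) 1).foldl
          (fun dp j => gCell (("" : String) :: s1.map sgl) (("" : String) :: s2.map sgl) cp rp ins dl i j dp) dp) dp) := by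
      refine pvFoldInv (pvShape s1.length s2.length) _ _ (fun s x _ h => ?_) dp hsh
      refine pvFoldInv (pvShape s1.length s2.length) _ _ (fun s' x' _ h' => ?_) s h
      simp only [gCell]
      exact pvShape_set2 _ _ _ h'
    have hpres := gInnerPres (("" : String) :: s1.map sgl) (("" : String) :: s2.map sgl) cp rp ins dl
      ((r + 1 : Nat) : Int) (by push_cast; omega) s2.length
    have hprevrow : ∀ q : Nat, q ≤ s2.length →
        pvGet2 ((PySem.List.pyRange 1 (1 + (r : Int)) 1).foldl
          (fun dp i => (PySem.List.pyRange 1 (1 + ((s2.length : Nat) : Int)) 1).foldl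
            (fun dp j => gCell (("" : String) :: s1.map sgl) (("" : String) :: s2.map sgl) cp rp ins dl i j dp) dp) dp)
          (((r + 1 : Nat) : Int) - 1) (q : Int) 0 = (sp s1 s2 cp rp ins dl ((r + 1) - 1) q).1 := by
      intro q hq
      rw [show (((r + 1 : Nat) : Int) - 1) = ((r : Nat) : Int) by push_cast; ring,
        show (r + 1 - 1 : Nat) = r from rfl]
      rcases Nat.eq_zero_or_pos r with hr0 | hr0
      · subst hr0
        rw [ih1 _ _ (by omega) (by omega) (by omega)]
        exact hrow0 q hq
      · rcases Nat.eq_zero_or_pos q with hq0 | hq0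
        · subst hq0
          rw [ih1 _ _ (by omega) (by omega) (by omega)]
          exact hcol0 r (by omega)
        · exact ih2 r q hr0 le_rfl hq0 hq
    have hcell0 : pvGet2 ((PySem.List.pyRange 1 (1 + (r : Int)) 1).foldl
        (fun dp i => (PySem.List.pyRange 1 (1 + ((s2.length : Nat) : Int)) 1).foldl
          (fun dp j => gCell (("" : String) :: s1.map sgl) (("" : String) :: s2.map sgl) cp rp ins dl i j dp) dp) dp)
        ((r + 1 : Nat) : Int) 0 0 = (sp s1 s2 cp rp ins dl (r + 1) 0).1 := by
      rw [ih1 _ _ (by omega) (by omega) (by push_cast; omega)]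
      exact hcol0 (r + 1) (by omega)
    rw [pvRange_succ]
    refine ⟨?_, ?_⟩
    · intro p q hp hq h
      rw [List.foldl_append]
      simp only [List.foldl_cons, List.foldl_nil]
      have hpres' := hpres
      rw [show ((r + 1 : Nat) : Int) = 1 + (r : Int) from by push_cast; ring] at hpres'
      rw [hpres' _ _ _ (by omega) (by omega) (by push_cast at h ⊢; omega)]
      refine ih1 p q hp hq ?_
      rintro ⟨ha, hb, hcc⟩
      refine h ⟨ha, ?_, hcc⟩
      push_cast
      omega
    · intro p q h1 h2 h3 h4
      rw [List.foldl_append]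
      simp only [List.foldl_cons, List.foldl_nil]
      by_cases hp : p = r + 1
      · subst hp
        have hg := gRow s1 s2 cp rp ins dl (r+1) (by omega) (by omega) s2.length le_rfl _ hshF hprevrow hcell0
        rw [show ((r + 1 : Nat) : Int) = 1 + (r : Int) from by push_cast; ring] at hg ⊢
        exact hg q h3 h4
      · have hpres' := hpres
        rw [show ((r + 1 : Nat) : Int) = 1 + (r : Int) from by push_cast; ring] at hpres'
        rw [hpres' _ _ _ (by omega) (by omega) (by push_cast; omega)]
        exact ih2 p q h1 (by omega) h3 h4
-- the move A's action table stores is the head of the reference plan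
theorem bMove_sp (s1 s2 : List Char) (cp rp ins dl : Int) (dp : List (List Int))
    (Hdp : ∀ a b : Nat, a ≤ s1.length → b ≤ s2.length →
      pvGet2 dp (a : Int) (b : Int) 0 = (sp s1 s2 cp rp ins dl a b).1)
    (p q : Nat) (hp : p ≤ s1.length) (hq : q ≤ s2.length) (h : 0 < p + q) :
    bMove dp (("" : String) :: s1.map sgl) (("" : String) :: s2.map sgl) cp rp ins dl (p : Int) (q : Int)
      = (sp s1 s2 cp rp ins dl p q).2.headD "" := by
  match p, q, h with
  | 0, q+1, _ => simp [bMove, sp]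
  | p+1, 0, _ =>
    rw [bMove, if_neg (show ¬((p+1 : Nat) : Int) = 0 by omega)]
    simp [sp]
  | p+1, q+1, _ =>
    have e1 : ((p+1 : Nat) : Int) - 1 = ((p : Nat) : Int) := by push_cast; ring
    have e2 : ((q+1 : Nat) : Int) - 1 = ((q : Nat) : Int) := by push_cast; ring
    have hd := Hdp p q (by omega) (by omega)
    have hl := Hdp (p+1) q (by omega) (by omega)
    have hu := Hdp p (q+1) (by omega) (by omega)
    have hcond := padEq s1 s2 p q (by omega) (by omega)
    rw [sp_eq_succ, bBest_head]
    rw [bMove, if_neg (show ¬((p+1 : Nat) : Int) = 0 by omega), if_neg (show ¬((q+1 : Nat) : Int) = 0 by omega)]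
    simp only [e1, e2, hd, hl, hu]
    rw [show ((p+1 : Nat) : Int) = 1 + (p : Int) from by push_cast; ring,
      show ((q+1 : Nat) : Int) = 1 + (q : Int) from by push_cast; ring]
    simp only [bBest]
    split_ifs <;> simp_all [hcond]

theorem join_sgl (cs : List Char) :
    PySem.Str.join "" (cs.map sgl) = String.ofList cs := by
  have h := congrArg String.ofList (PySem.Str.toList_join "" (cs.map sgl))
  rw [String.ofList_toList] at h
  rw [h]
  congr 1
  rw [List.map_map]
  have he : (String.toList ∘ sgl) = fun c => [c] := by
    funext c; simp [sgl, String.toList_ofList]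
  rw [he, show ("" : String).toList = ([] : List Char) from rfl]
  exact PySem.Chars.join_nil_singletons cs
theorem align_plan_spec : Claim_equal_align_plan := by
  intro d1 d2 cp rp ins dl _
  unfold Spec_align_plan
  simp only [align_plan, align_plan_alt, PySem.Str.len_eq]
  rw [show (fun c : Char => String.ofList [c]) = sgl from rfl]
  rw [show ((d1.toList.length : Nat) : Int) + 1 = 1 + ((d1.toList.length : Nat) : Int) from by ring]
  rw [show ((d2.toList.length : Nat) : Int) + 1 = 1 + ((d2.toList.length : Nat) : Int) from by ring]
  rw [show (1 + ((d1.toList.length : Nat) : Int)).toNat = d1.toList.length + 1 from by omega]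
  rw [show (1 + ((d2.toList.length : Nat) : Int)).toNat = d2.toList.length + 1 from by omega]
  set L1 : List String := ("" : String) :: d1.toList.map sgl with hL1
  set L2 : List String := ("" : String) :: d2.toList.map sgl with hL2
  set st0 : List (List Int) × List (List (Option String)) :=
    (List.replicate (d1.toList.length + 1) (List.replicate (d2.toList.length + 1) 0),
     List.replicate (d1.toList.length + 1) (List.replicate (d2.toList.length + 1) none)) with hst0
  set st1 := (PySem.List.pyRange 1 (1 + ((d2.toList.length : Nat) : Int)) 1).foldl
    (fun st i => (pvSet2 st.1 0 i (pvGet2 st.1 0 (i-1) 0 + ins), pvSet2 st.2 0 i (some "I"))) st0 with hst1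
  set st2 := (PySem.List.pyRange 1 (1 + ((d1.toList.length : Nat) : Int)) 1).foldl
    (fun st i => (pvSet2 st.1 i 0 (pvGet2 st.1 (i-1) 0 0 + dl), pvSet2 st.2 i 0 (some "D"))) st1 with hst2
  set st3 := (PySem.List.pyRange 1 (1 + ((d1.toList.length : Nat) : Int)) 1).foldl
    (fun st i => (PySem.List.pyRange 1 (1 + ((d2.toList.length : Nat) : Int)) 1).foldl
      (fun st j => aCell L1 L2 cp rp ins dl i j st) st) st2 with hst3
  set dp1 := (PySem.List.pyRange 1 (1 + ((d2.toList.length : Nat) : Int)) 1).foldl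
    (fun dp j => pvSet2 dp 0 j (pvGet2 dp 0 (j-1) 0 + ins))
    (List.replicate (d1.toList.length + 1) (List.replicate (d2.toList.length + 1) 0)) with hdp1
  set dp2 := (PySem.List.pyRange 1 (1 + ((d1.toList.length : Nat) : Int)) 1).foldl
    (fun dp i => pvSet2 dp i 0 (pvGet2 dp (i-1) 0 0 + dl)) dp1 with hdp2
  set dpB := (PySem.List.pyRange 1 (1 + ((d1.toList.length : Nat) : Int)) 1).foldl
    (fun dp i => (PySem.List.pyRange 1 (1 + ((d2.toList.length : Nat) : Int)) 1).foldl
      (fun dp j => gCell L1 L2 cp rp ins dl i j dp) dp) dp2 with hdpB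
  -- shapes
  have hsh0 : pvShape d1.toList.length d2.toList.length st0.1 ∧ pvShape d1.toList.length d2.toList.length st0.2 := by
    rw [hst0]
    exact ⟨pvShape_replicate _ _ _, pvShape_replicate _ _ _⟩
  have hsh1 : pvShape d1.toList.length d2.toList.length st1.1 ∧ pvShape d1.toList.length d2.toList.length st1.2 := by
    rw [hst1]
    exact pvFoldInv (fun st : List (List Int) × List (List (Option String)) =>
        pvShape d1.toList.length d2.toList.length st.1 ∧ pvShape d1.toList.length d2.toList.length st.2)
      _ _ (fun s x _ h => ⟨by exact pvShape_set2 _ _ _ h.1, by exact pvShape_set2 _ _ _ h.2⟩) st0 hsh0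
  have hsh2 : pvShape d1.toList.length d2.toList.length st2.1 ∧ pvShape d1.toList.length d2.toList.length st2.2 := by
    rw [hst2]
    exact pvFoldInv (fun st : List (List Int) × List (List (Option String)) =>
        pvShape d1.toList.length d2.toList.length st.1 ∧ pvShape d1.toList.length d2.toList.length st.2)
      _ _ (fun s x _ h => ⟨by exact pvShape_set2 _ _ _ h.1, by exact pvShape_set2 _ _ _ h.2⟩) st1 hsh1
  have hshdp1 : pvShape d1.toList.length d2.toList.length dp1 := by
    rw [hdp1]
    exact pvFoldInv (pvShape d1.toList.length d2.toList.length) _ _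
      (fun s x _ h => pvShape_set2 _ _ _ h) _ (pvShape_replicate _ _ _)
  have hshdp2 : pvShape d1.toList.length d2.toList.length dp2 := by
    rw [hdp2]
    exact pvFoldInv (pvShape d1.toList.length d2.toList.length) _ _
      (fun s x _ h => pvShape_set2 _ _ _ h) _ hshdp1
  -- dp components of A's fold agree with the ghost fill
  have h1 : st1.1 = dp1 := by
    rw [hst1, hdp1, hst0]
    exact pvFoldFst _ _ _ (fun st x => rfl) _
  have h2 : st2.1 = dp2 := by
    rw [hst2, hdp2]
    rw [pvFoldFst _ _ (fun dp i => pvSet2 dp i 0 (pvGet2 dp (i-1) 0 0 + dl)) (fun st x => rfl) st1, h1]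
  have h3 : st3.1 = dpB := by
    rw [hst3, hdpB]
    rw [pvFoldFstInv (fun st => pvShape d1.toList.length d2.toList.length st.1 ∧
          pvShape d1.toList.length d2.toList.length st.2) _ _
        (fun dp i => (PySem.List.pyRange 1 (1 + ((d2.toList.length : Nat) : Int)) 1).foldl
          (fun dp j => gCell L1 L2 cp rp ins dl i j dp) dp)
        (fun s x _ h => aRowShape L1 L2 cp rp ins dl x _ s h)
        (fun s x hx h => by
          have hb := PySem.List.mem_pyRange_one.mp hx
          exact innerFst L1 L2 cp rp ins dl x (by omega) (by push_cast at hb ⊢; omega)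
            d2.toList.length le_rfl s h)
        st2 hsh2, h2]
  -- ghost cost characterization
  obtain ⟨gc1, gc2⟩ := gColCost d1.toList d2.toList cp rp ins dl d1.toList.length d2.toList.length
    d2.toList.length le_rfl
  obtain ⟨gr1, gr2⟩ := gRowCost d1.toList d2.toList cp rp ins dl d1.toList.length d2.toList.length
    d1.toList.length le_rfl dp1 hshdp1 (by rw [hdp1]; exact gc1 0 0 (by omega))
  have hRow0 : ∀ q : Nat, q ≤ d2.toList.length →
      pvGet2 dp2 0 (q : Int) 0 = (sp d1.toList d2.toList cp rp ins dl 0 q).1 := by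
    intro q hq
    rw [hdp2, gr1 0 (q : Int) (by omega), hdp1]
    rcases Nat.eq_zero_or_pos q with h0 | h0
    · subst h0
      simp only [Nat.cast_zero]
      rw [gc1 0 0 (by omega)]
      simp [sp]
    · exact gc2 q h0 hq
  have hCol0 : ∀ p : Nat, p ≤ d1.toList.length →
      pvGet2 dp2 (p : Int) 0 0 = (sp d1.toList d2.toList cp rp ins dl p 0).1 := by
    intro p hp
    rcases Nat.eq_zero_or_pos p with h0 | h0
    · subst h0
      simp only [Nat.cast_zero]
      rw [hdp2, gr1 0 0 (by omega), hdp1, gc1 0 0 (by omega)]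
      simp [sp]
    · rw [hdp2]
      exact gr2 p h0 hp
  obtain ⟨gf1, gf2⟩ := gFill d1.toList d2.toList cp rp ins dl d1.toList.length le_rfl dp2 hshdp2 hRow0 hCol0
  rw [← hL1, ← hL2] at gf1 gf2
  have Hdp : ∀ a b : Nat, a ≤ d1.toList.length → b ≤ d2.toList.length →
      pvGet2 dpB (a : Int) (b : Int) 0 = (sp d1.toList d2.toList cp rp ins dl a b).1 := by
    intro a b ha hb
    rcases Nat.eq_zero_or_pos a with ha0 | ha0
    · subst ha0
      simp only [Nat.cast_zero]
      rw [hdpB, gf1 0 (b : Int) (by omega) (by omega) (by omega)]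
      exact hRow0 b hb
    · rcases Nat.eq_zero_or_pos b with hb0 | hb0
      · subst hb0
        simp only [Nat.cast_zero]
        rw [hdpB, gf1 (a : Int) 0 (by omega) (by omega) (by omega)]
        exact hCol0 a ha
      · rw [hdpB]
        exact gf2 a b ha0 ha hb0 hb
  -- stored actions are the reference plan heads
  obtain ⟨o1, o2⟩ := outerAct (M := d1.toList.length) (N := d2.toList.length)
    L1 L2 cp rp ins dl d1.toList.length le_rfl st2 hsh2.1 hsh2.2
  obtain ⟨r1, r2⟩ := initRowAct (M := d1.toList.length) (N := d2.toList.length)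
    dl d1.toList.length le_rfl st1 hsh1.2
  obtain ⟨c1, c2⟩ := initColAct (M := d1.toList.length) (N := d2.toList.length)
    ins d2.toList.length le_rfl st0 hsh0.2
  have H : ∀ p q : Nat, p ≤ d1.toList.length → q ≤ d2.toList.length → 0 < p + q →
      pvGet2 st3.2 (p : Int) (q : Int) none
        = some ((sp d1.toList d2.toList cp rp ins dl p q).2.headD "") := by
    intro p q hpm hqn hg
    rcases Nat.eq_zero_or_pos p with hp0 | hp0
    · subst hp0
      simp only [Nat.cast_zero]
      have hq : 1 ≤ q := by omega
      rw [hst3, o1 0 (q : Int) le_rfl (by omega) (by rintro ⟨ha, _⟩; omega)]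
      rw [hst2, r1 0 (q : Int) le_rfl (by omega) (by rintro ⟨ha, _, _⟩; omega)]
      rw [hst1, c2 (q : Int) (by omega) (by omega)]
      rw [← bMove_sp d1.toList d2.toList cp rp ins dl dpB Hdp 0 q (by omega) hqn hg]
      simp [bMove]
    · rcases Nat.eq_zero_or_pos q with hq0 | hq0
      · subst hq0
        simp only [Nat.cast_zero]
        rw [hst3, o1 (p : Int) 0 (by omega) le_rfl (by rintro ⟨_, _, hc, _⟩; omega)]
        rw [hst2, r2 (p : Int) (by omega) (by omega)]
        rw [← bMove_sp d1.toList d2.toList cp rp ins dl dpB Hdp p 0 hpm (by omega) hg]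
        rw [bMove, if_neg (show ¬(p : Int) = 0 by omega)]
        simp
      · have hthis := o2 (p : Int) (q : Int) (by omega) (by omega) (by omega) (by omega)
        rw [← hst3] at hthis
        rw [h3] at hthis
        rw [hthis, hL1, hL2, bMove_sp d1.toList d2.toList cp rp ins dl dpB Hdp p q hpm hqn hg]
  -- traceback = reference plan
  have htr := trace_sp st3.2 d1.toList d2.toList cp rp ins dl H
    ((((d1.toList.length : Nat) : Int) + ((d2.toList.length : Nat) : Int)).toNat + 1)
    d1.toList.length d2.toList.length le_rfl le_rfl (by omega)
  rw [htr, ← List.map_reverse]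
  -- render both ways
  have hcnt := sp_cnt d1.toList d2.toList cp rp ins dl (d1.toList.length + d2.toList.length)
    d1.toList.length d2.toList.length rfl
  have hcnt1 : (((sp d1.toList d2.toList cp rp ins dl d1.toList.length d2.toList.length).2.reverse).filter
      (fun a => a ≠ "I")).length = d1.toList.length := by
    rw [List.filter_reverse, List.length_reverse]
    exact hcnt.1
  have hcnt2 : (((sp d1.toList d2.toList cp rp ins dl d1.toList.length d2.toList.length).2.reverse).filter
      (fun a => a ≠ "D")).length = d2.toList.length := by
    rw [List.filter_reverse, List.length_reverse]
    exact hcnt.2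
  have hrender := renderAB d1.toList d2.toList
    ((sp d1.toList d2.toList cp rp ins dl d1.toList.length d2.toList.length).2.reverse)
    0 0 [] [] [] (by rw [hcnt1]; omega) (by rw [hcnt2]; omega)
  rw [List.drop_zero, List.drop_zero] at hrender
  rw [show (1 + ((0 : Nat) : Int)) = 1 from by norm_num] at hrender
  rw [hrender]
  -- finish both sides
  rw [bRow0_eq d1.toList d2.toList cp rp ins dl]
  have hrows := bRows_eq d1.toList d2.toList cp rp ins dl d1.toList.length 0 (by omega)
  rw [List.drop_zero] at hrows
  rw [hrows, getLastD_map_range, bUnwind_id, List.nil_append]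
  simp only [List.nil_append]
  rw [join_sgl, join_sgl, join_sgl]
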